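-- pv_equiv track=rewrite | github.com/zeze98/Algorithm | 프로그래머스/2/250136. ［PCCP 기출문제］ 2번 ／ 석유 시추/［PCCP 기출문제］ 2번 ／ 석유 시추.py | solution
-- ===== SOURCE A (Python) =====
-- from collections import deque
--
-- def solution(land):
--     n = len(land)
--     m = len(land[0])
--     ans = [0 for _ in range(m)]
--     visit = [[False for _ in range(m)] for _ in range(n)]
--
--     def bfs(y, x, visit):
--         q = deque([(y, x)])
--         visit[y][x] = True
--         cnt = 0
--         dy = [1, 0, 0, -1]
--         dx = [0, 1, -1, 0]
--         minX, maxX = 501, 0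
--         while q:
--             y, x = q.popleft()
--             cnt += 1
--             minX, maxX = min(minX, x), max(maxX, x)
--             for i in range(4):
--                 ny = y + dy[i]
--                 nx = x + dx[i]
--
--                 if 0 <= ny < n and 0 <= nx < m and visit[ny][nx] == False and land[ny][nx] == 1:
--                     q.append((ny, nx))
--                     visit[ny][nx] = True
--
--         for i in range(minX, maxX+1):
--             ans[i] += cnt
--
--     for y in range(n):
--         for x in range(m):
--             if visit[y][x] == False and land[y][x] == 1:
--                 bfs(y, x, visit)
--     answer = max(ans)
--     return answer
-- ===== SOURCE B (Python) =====
-- def solution(land):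
--     n = len(land)
--     m = len(land[0])
--     parent = list(range(n * m))
--
--     def find(i):
--         while parent[i] != i:
--             i = parent[i]
--         return i
--
--     def union(a, b):
--         ra, rb = find(a), find(b)
--         if ra == rb:
--             return
--         if ra < rb:
--             parent[rb] = ra
--         else:
--             parent[ra] = rb
--
--     for y in range(n):
--         for x in range(m):
--             if land[y][x] == 1:
--                 i = y * m + x
--                 if x + 1 < m and land[y][x + 1] == 1:
--                     union(i, i + 1)
--                 if y + 1 < n and land[y + 1][x] == 1:
--                     union(i, i + m)
--
--     size = {}
--     lo = {}
--     hi = {}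
--     for y in range(n):
--         for x in range(m):
--             if land[y][x] == 1:
--                 r = find(y * m + x)
--                 size[r] = size.get(r, 0) + 1
--                 lo[r] = min(lo.get(r, 501), x)  # 501/0 = the column window bounds (problem guarantees m <= 500)
--                 hi[r] = max(hi.get(r, 0), x)
--
--     ans = [0] * m
--     for r in size:
--         s = size[r]
--         for i in range(lo[r], hi[r] + 1):
--             ans[i] += s
--     return max(ans)
-- ===== Notes on version B (the rewrite author's own statement) =====
-- stated objective: alternative
-- what changed: Replaces the per-seed BFS flood fill with a union-find (DSU, union-by-min-root) over the flattened grid: one pass unions each 1-cell with its right/down 1-neighbours, a second pass accumulates per-root size and min/max column into dicts, then the same per-component interval additions and max are performed; B keeps A's 501/0 column-window bounds (the problem guarantees m <= 500).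
import Mathlib
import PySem

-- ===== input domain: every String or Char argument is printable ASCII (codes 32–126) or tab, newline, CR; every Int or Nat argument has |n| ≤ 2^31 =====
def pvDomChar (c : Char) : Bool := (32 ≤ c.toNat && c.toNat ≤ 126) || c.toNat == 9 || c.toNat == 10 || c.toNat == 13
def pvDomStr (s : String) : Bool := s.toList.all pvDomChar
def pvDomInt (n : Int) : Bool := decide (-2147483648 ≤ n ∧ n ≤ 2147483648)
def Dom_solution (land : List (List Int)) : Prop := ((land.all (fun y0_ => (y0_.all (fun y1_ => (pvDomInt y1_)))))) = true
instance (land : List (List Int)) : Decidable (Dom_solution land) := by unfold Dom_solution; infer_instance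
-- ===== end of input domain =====

-- B replaces A's per-seed BFS flood fill by a union-find (DSU) over the flattened grid
-- (objective: alternative data structure, similar cost; B keeps A's 501/0 column-window
-- bounds, which the problem statement's m ≤ 500 makes exact).

-- ===== PORT A =====
-- land[y][x] (indices known in range where used; getD is exact there)
def pvCell (land : List (List Int)) (y x : Nat) : Int := (land.getD y []).getD x 0
-- visit[y][x] and visit[y][x] = True
def pvVisGet (v : List (List Bool)) (y x : Nat) : Bool := (v.getD y []).getD x false
def pvVisSet (v : List (List Bool)) (y x : Nat) : List (List Bool) :=
  v.set y ((v.getD y []).set x true)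
-- dy/dx direction table of A, zipped
def pvDirs : List (Int × Int) := [(1, 0), (0, 1), (0, -1), (-1, 0)]

-- the while-q loop of bfs; fuel 2*n*m+1 dominates the loop measure 2*(#unvisited)+len(q),
-- so the 0-fuel branch is never taken on the executions A performs
def pvBfsLoop (land : List (List Int)) (n m : Nat) :
    Nat → List (Int × Int) → List (List Bool) → Int → Int → Int →
    (List (List Bool) × Int × Int × Int)
  | _, [], visit, cnt, minX, maxX => (visit, cnt, minX, maxX)
  | 0, _ :: _, visit, cnt, minX, maxX => (visit, cnt, minX, maxX)
  | fuel + 1, (y, x) :: q, visit, cnt, minX, maxX =>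
      let s := pvDirs.foldl (fun (s : List (Int × Int) × List (List Bool)) d =>
          let ny := y + d.1
          let nx := x + d.2
          if 0 ≤ ny ∧ ny < (n : Int) ∧ 0 ≤ nx ∧ nx < (m : Int) ∧
              pvVisGet s.2 ny.toNat nx.toNat = false ∧ pvCell land ny.toNat nx.toNat = 1
          then (s.1 ++ [(ny, nx)], pvVisSet s.2 ny.toNat nx.toNat)
          else s) (q, visit)
      pvBfsLoop land n m fuel s.1 s.2 (cnt + 1) (min minX x) (max maxX x)

-- bfs(y, x, visit): returns (visit, cnt, minX, maxX)
def pvBfs (land : List (List Int)) (n m y x : Nat) (visit : List (List Bool)) :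
    List (List Bool) × Int × Int × Int :=
  pvBfsLoop land n m (2 * (n * m) + 1) [((y : Int), (x : Int))] (pvVisSet visit y x) 0 501 0

-- for i in range(minX, maxX+1): ans[i] += cnt   (i ≥ 0 on every executed call: toNat exact)
def pvAddRange (ans : List Int) (lo hi cnt : Int) : List Int :=
  (PySem.List.pyRange lo (hi + 1) 1).foldl
    (fun a i => a.set i.toNat (a.getD i.toNat 0 + cnt)) ans

def solution (land : List (List Int)) : Int :=
  let n := land.length
  let m := (land.getD 0 []).length
  let st := (List.range n).foldl (fun st y =>
      (List.range m).foldl (fun (st : List Int × List (List Bool)) x =>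
        if pvVisGet st.2 y x = false ∧ pvCell land y x = 1 then
          let r := pvBfs land n m y x st.2
          (pvAddRange st.1 r.2.2.1 r.2.2.2 r.2.1, r.1)
        else st) st)
    (List.replicate m 0, List.replicate n (List.replicate m false))
  (PySem.List.max? st.1 (fun v => v)).getD 0

-- ===== PORT B =====
-- find(i): while parent[i] != i: i = parent[i]; fuel n*m dominates the strictly
-- decreasing parent chain, so the 0-fuel branch is never taken on B's executions
def pvFind (parent : List Nat) : Nat → Nat → Nat
  | 0, i => i
  | fuel + 1, i =>
      let p := parent.getD i i
      if p = i then i else pvFind parent fuel p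

-- union(a, b): point the larger root at the smaller one
def pvUnion (parent : List Nat) (fuel a b : Nat) : List Nat :=
  let ra := pvFind parent fuel a
  let rb := pvFind parent fuel b
  if ra = rb then parent
  else if ra < rb then parent.set rb ra else parent.set ra rb

-- first pass: union each 1-cell with its right and down 1-neighbours
def pvBuildParent (land : List (List Int)) (n m : Nat) : List Nat :=
  (List.range n).foldl (fun par y =>
    (List.range m).foldl (fun (par : List Nat) x =>
      if pvCell land y x = 1 then
        let i := y * m + x
        let par1 := if x + 1 < m ∧ pvCell land y (x + 1) = 1 then pvUnion par (n * m) i (i + 1) else par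
        if y + 1 < n ∧ pvCell land (y + 1) x = 1 then pvUnion par1 (n * m) i (i + m) else par1
      else par) par) (List.range (n * m))

-- second pass: size/lo/hi dicts keyed by the component root
def pvStats (land : List (List Int)) (n m : Nat) (parent : List Nat) :
    PySem.Dict Nat Int × PySem.Dict Nat Int × PySem.Dict Nat Int :=
  (List.range n).foldl (fun st y =>
    (List.range m).foldl
      (fun (st : PySem.Dict Nat Int × PySem.Dict Nat Int × PySem.Dict Nat Int) x =>
        if pvCell land y x = 1 then
          let r := pvFind parent (n * m) (y * m + x)
          (st.1.insert r (st.1.getD r 0 + 1),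
           st.2.1.insert r (min (st.2.1.getD r 501) (x : Int)),
           st.2.2.insert r (max (st.2.2.getD r 0) (x : Int)))
        else st) st)
    (PySem.Dict.empty, PySem.Dict.empty, PySem.Dict.empty)

-- for i in range(lo[r], hi[r]+1): ans[i] += s   (i ≥ 0 on every executed call)
def pvAddRangeB (ans : List Int) (lo hi s : Int) : List Int :=
  (PySem.List.pyRange lo (hi + 1) 1).foldl
    (fun a i => a.set i.toNat (a.getD i.toNat 0 + s)) ans

def solution_alt (land : List (List Int)) : Int :=
  let n := land.length
  let m := (land.getD 0 []).length
  let parent := pvBuildParent land n m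
  let st := pvStats land n m parent
  let ans := st.1.keys.foldl (fun a r =>
      pvAddRangeB a (st.2.1.getD r 0) (st.2.2.getD r 0) (st.1.getD r 0))
    (List.replicate m 0)
  (PySem.List.max? ans (fun v => v)).getD 0

-- ===== PRECONDITION & SPEC =====
-- A raises exactly when the grid has no rows (IndexError), when its first row is
-- empty (max of an empty list, ValueError) or when some row is shorter than the
-- first row (IndexError while scanning that row); Pre_ excludes precisely those inputs.
def Pre_solution (land : List (List Int)) : Prop :=
  land ≠ [] ∧ (land.getD 0 []).length ≠ 0 ∧
    ∀ row ∈ land, (land.getD 0 []).length ≤ row.length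
instance (land : List (List Int)) : Decidable (Pre_solution land) := by
  unfold Pre_solution; infer_instance

def pvWitness_solution : List (List Int) := [[1, 0], [1, 1]]

def Spec_solution (land : List (List Int)) (out : Int) : Prop := out = solution_alt land
instance (land : List (List Int)) (out : Int) : Decidable (Spec_solution land out) := by
  unfold Spec_solution; infer_instance

-- ===== CLAIM (what is proved, stated in full; the proofs are below) =====
def Claim_equal_solution : Prop :=
  ∀ (land : List (List Int)), Dom_solution land → Pre_solution land →
    Spec_solution land (solution land)

-- ===== LEMMAS AND PROOFS =====

-- canonical (proof-side) view of the grid: cells, adjacency, reachability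
def pvOneP (land : List (List Int)) (n m : Nat) (c : Nat × Nat) : Prop :=
  c.1 < n ∧ c.2 < m ∧ pvCell land c.1 c.2 = 1

def pvAdjP (land : List (List Int)) (n m : Nat) (c d : Nat × Nat) : Prop :=
  pvOneP land n m c ∧ pvOneP land n m d ∧
    ((c.1 = d.1 ∧ (c.2 + 1 = d.2 ∨ d.2 + 1 = c.2)) ∨
     (c.2 = d.2 ∧ (c.1 + 1 = d.1 ∨ d.1 + 1 = c.1)))

def pvReachP (land : List (List Int)) (n m : Nat) : (Nat × Nat) → (Nat × Nat) → Prop :=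
  Relation.ReflTransGen (pvAdjP land n m)

def pvIdx (m : Nat) (c : Nat × Nat) : Nat := c.1 * m + c.2

def pvScanL (n m : Nat) : List (Nat × Nat) :=
  (List.range n).flatMap (fun y => (List.range m).map (fun x => (y, x)))

def pvIsRootP (land : List (List Int)) (n m : Nat) (c : Nat × Nat) : Prop :=
  pvOneP land n m c ∧ ∀ d, pvReachP land n m c d → pvIdx m c ≤ pvIdx m d

noncomputable def pvMembersC (land : List (List Int)) (n m : Nat) (c : Nat × Nat) :
    List (Nat × Nat) :=
  (pvScanL n m).filter (fun d =>
    @decide _ (Classical.propDecidable (pvOneP land n m d ∧ pvReachP land n m c d)))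

noncomputable def pvRootsL (land : List (List Int)) (n m : Nat) : List (Nat × Nat) :=
  (pvScanL n m).filter (fun c => @decide _ (Classical.propDecidable (pvIsRootP land n m c)))

noncomputable def pvCntC (land : List (List Int)) (n m : Nat) (c : Nat × Nat) : Int :=
  ((pvMembersC land n m c).length : Int)

noncomputable def pvLoC (land : List (List Int)) (n m : Nat) (c : Nat × Nat) : Int :=
  (pvMembersC land n m c).foldl (fun a d => min a (d.2 : Int)) 501

noncomputable def pvHiC (land : List (List Int)) (n m : Nat) (c : Nat × Nat) : Int :=
  (pvMembersC land n m c).foldl (fun a d => max a (d.2 : Int)) 0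

noncomputable def pvAnsC (land : List (List Int)) (n m : Nat) : List Int :=
  (pvRootsL land n m).foldl
    (fun a c => pvAddRange a (pvLoC land n m c) (pvHiC land n m c) (pvCntC land n m c))
    (List.replicate m 0)

-- basic facts
theorem pvAdjP_symm (land : List (List Int)) (n m : Nat) :
    Symmetric (pvAdjP land n m) := by
  intro c d h
  obtain ⟨h1, h2, h3⟩ := h
  exact ⟨h2, h1, by omega⟩

theorem pvReachP_symm (land : List (List Int)) (n m : Nat) {c d : Nat × Nat}
    (h : pvReachP land n m c d) : pvReachP land n m d c :=
  Relation.ReflTransGen.symmetric (pvAdjP_symm land n m) h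

theorem pvReachP_one_right (land : List (List Int)) (n m : Nat) {c d : Nat × Nat}
    (hc : pvOneP land n m c) (h : pvReachP land n m c d) : pvOneP land n m d := by
  induction h with
  | refl => exact hc
  | tail _ hadj _ => exact hadj.2.1

theorem mem_pvScanL (n m : Nat) (c : Nat × Nat) :
    c ∈ pvScanL n m ↔ c.1 < n ∧ c.2 < m := by
  unfold pvScanL
  simp only [List.mem_flatMap, List.mem_map, List.mem_range]
  constructor
  · rintro ⟨y, hy, x, hx, rfl⟩; exact ⟨hy, hx⟩
  · rintro ⟨h1, h2⟩; exact ⟨c.1, h1, c.2, h2, rfl⟩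

theorem pvScanL_eq_map (n m : Nat) (hm : 0 < m) :
    pvScanL n m = (List.range (n * m)).map (fun i => (i / m, i % m)) := by
  unfold pvScanL
  induction n with
  | zero => simp
  | succ k ih =>
      rw [List.range_succ, List.flatMap_append, ih, Nat.succ_mul, List.range_add,
        List.map_append]
      congr 1
      simp only [List.flatMap_singleton, List.map_map]
      apply List.map_congr_left
      intro x hx
      simp only [List.mem_range] at hx
      simp only [Function.comp_apply]
      have h1 : (k * m + x) / m = k := by
        rw [mul_comm, Nat.mul_add_div hm, Nat.div_eq_of_lt hx]
        omega
      have h2 : (k * m + x) % m = x := by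
        rw [mul_comm, Nat.mul_add_mod]
        exact Nat.mod_eq_of_lt hx
      rw [h1, h2]

theorem pvScanL_pairwise (n m : Nat) (hm : 0 < m) :
    (pvScanL n m).Pairwise (fun c d => pvIdx m c < pvIdx m d) := by
  rw [pvScanL_eq_map n m hm, List.pairwise_map]
  have := List.pairwise_lt_range (n := n * m)
  apply this.imp_of_mem
  intro a b _ _ h
  unfold pvIdx
  simp only
  have ha := Nat.div_add_mod a m
  have hb := Nat.div_add_mod b m
  rw [Nat.mul_comm (a / m) m, Nat.mul_comm (b / m) m]
  omega

theorem pvScanL_nodup (n m : Nat) (hm : 0 < m) : (pvScanL n m).Nodup := by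
  have h := pvScanL_pairwise n m hm
  have h2 : (pvScanL n m).Pairwise (fun c d => c ≠ d) := by
    apply h.imp
    intro a b hab he
    subst he
    omega
  exact h2

-- scan-prefix characterization
theorem pvScanL_prefix_mem (n m : Nat) (hm : 0 < m) (pre suf : List (Nat × Nat))
    (e : Nat × Nat) (hdec : pvScanL n m = pre ++ e :: suf) (c : Nat × Nat) :
    c ∈ pre ↔ c.1 < n ∧ c.2 < m ∧ pvIdx m c < pvIdx m e := by
  have hp := pvScanL_pairwise n m hm
  rw [hdec] at hp
  rw [List.pairwise_append] at hp
  obtain ⟨hp1, hp2, hp3⟩ := hp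
  rw [List.pairwise_cons] at hp2
  constructor
  · intro hc
    have hmem : c ∈ pvScanL n m := by rw [hdec]; exact List.mem_append_left _ hc
    rw [mem_pvScanL] at hmem
    exact ⟨hmem.1, hmem.2, hp3 c hc e (List.mem_cons_self)⟩
  · rintro ⟨h1, h2, h3⟩
    have hmem : c ∈ pvScanL n m := (mem_pvScanL n m c).mpr ⟨h1, h2⟩
    rw [hdec] at hmem
    rcases List.mem_append.mp hmem with h | h
    · exact h
    · rcases List.mem_cons.mp h with h | h
      · subst h; omega
      · have := hp2.1 c h; omega

-- generic foldl induction with the processed prefix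
theorem pvFoldlInd {α σ : Type} (l : List α) (f : σ → α → σ) (init : σ)
    (P : List α → σ → Prop) (h0 : P [] init)
    (hstep : ∀ pre e suf st, l = pre ++ e :: suf → P pre st → P (pre ++ [e]) (f st e)) :
    P l (l.foldl f init) := by
  suffices h : ∀ suf pre st, l = pre ++ suf → P pre st → P (pre ++ suf) (suf.foldl f st) by
    simpa using h l [] init rfl h0
  intro suf
  induction suf with
  | nil => intro pre st h hP; simpa using hP
  | cons e rest ih =>
      intro pre st h hP
      have h2 : l = (pre ++ [e]) ++ rest := by simpa using h
      have h3 := ih (pre ++ [e]) (f st e) h2 (hstep pre e rest st h hP)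
      simpa using h3

-- the nested y/x loops are the fold over the scan list
theorem pvFoldlScan {σ : Type} (n m : Nat) (g : σ → Nat × Nat → σ) (init : σ) :
    (pvScanL n m).foldl g init
      = (List.range n).foldl
          (fun st y => (List.range m).foldl (fun st x => g st (y, x)) st) init := by
  unfold pvScanL
  rw [List.foldl_flatMap]
  simp [List.foldl_map]

-- visit-array semantics
def pvSH (n m : Nat) (v : List (List Bool)) : Prop :=
  v.length = n ∧ ∀ r ∈ v, r.length = m

def pvVm (n m : Nat) (v : List (List Bool)) (c : Nat × Nat) : Prop :=
  c.1 < n ∧ c.2 < m ∧ pvVisGet v c.1 c.2 = true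

def pvFCnt (v : List (List Bool)) : Nat := (v.map (fun r => r.count false)).sum

theorem pvSH_replicate (n m : Nat) : pvSH n m (List.replicate n (List.replicate m false)) := by
  constructor
  · simp
  · intro r hr
    rw [List.eq_of_mem_replicate hr]
    simp

theorem pvVisGet_replicate (n m y x : Nat) :
    pvVisGet (List.replicate n (List.replicate m false)) y x = false := by
  unfold pvVisGet
  have hrow : (List.replicate n (List.replicate m false)).getD y []
      = if y < n then List.replicate m false else [] := by
    by_cases hy : y < n
    · rw [if_pos hy, List.getD_eq_getElem _ _ (by simpa using hy), List.getElem_replicate]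
    · rw [if_neg hy]
      exact List.getD_eq_default _ _ (by simpa using Nat.le_of_not_lt hy)
  rw [hrow]
  split_ifs
  · by_cases hx : x < m
    · rw [List.getD_eq_getElem _ _ (by simpa using hx), List.getElem_replicate]
    · exact List.getD_eq_default _ _ (by simpa using Nat.le_of_not_lt hx)
  · exact List.getD_eq_default _ _ (by simp)

theorem pvVisGet_set (n m : Nat) (v : List (List Bool)) (hv : pvSH n m v)
    (y x : Nat) (hy : y < n) (hx : x < m) (y' x' : Nat) :
    pvVisGet (pvVisSet v y x) y' x'
      = if y' = y ∧ x' = x then true else pvVisGet v y' x' := by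
  have hn := hv.1
  have hylen : y < v.length := by omega
  have hrl : v[y].length = m := hv.2 _ (List.getElem_mem hylen)
  simp only [pvVisSet, pvVisGet, List.getD_eq_getElem?_getD]
  rw [List.getElem?_set]
  have hsome : v[y]? = some v[y] := List.getElem?_eq_getElem hylen
  rw [hsome]
  simp only [Option.getD_some]
  by_cases hyy : y = y'
  · subst hyy
    rw [if_pos rfl, if_pos hylen]
    simp only [Option.getD_some]
    rw [List.getElem?_set]
    by_cases hxx : x = x'
    · subst hxx
      rw [if_pos rfl, if_pos (by omega)]
      simp
    · rw [if_neg hxx, if_neg (by tauto), hsome]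
      simp
  · rw [if_neg hyy, if_neg (by tauto)]

theorem pvSH_set (n m : Nat) (v : List (List Bool)) (hv : pvSH n m v)
    (y x : Nat) (hy : y < n) : pvSH n m (pvVisSet v y x) := by
  have hn := hv.1
  unfold pvVisSet
  constructor
  · rw [List.length_set]; exact hv.1
  · intro r hr
    rcases List.mem_or_eq_of_mem_set hr with h | h
    · exact hv.2 _ h
    · subst h
      rw [List.length_set]
      have hylen : y < v.length := by omega
      rw [List.getD_eq_getElem _ _ hylen]
      exact hv.2 _ (List.getElem_mem hylen)

theorem pvFCnt_set (n m : Nat) (v : List (List Bool)) (hv : pvSH n m v)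
    (y x : Nat) (hy : y < n) (hx : x < m) (hg : pvVisGet v y x = false) :
    pvFCnt v = pvFCnt (pvVisSet v y x) + 1 := by
  have hn := hv.1
  have hylen : y < v.length := by omega
  have hrow : v.getD y [] = v[y] := List.getD_eq_getElem _ _ hylen
  have hrl : v[y].length = m := hv.2 _ (List.getElem_mem hylen)
  unfold pvVisGet at hg
  rw [hrow, List.getD_eq_getElem _ _ (by omega)] at hg
  unfold pvFCnt pvVisSet
  rw [hrow]
  have hcount : (v[y].set x true).count false = v[y].count false - 1 ∧ 1 ≤ v[y].count false := by
    rw [List.count_set (by omega)]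
    constructor
    · simp [hg]
    · have hmem : (false : Bool) ∈ v[y] := by
        rw [← hg]; exact List.getElem_mem (by omega)
      have := List.count_pos_iff.mpr hmem
      omega
  rw [List.map_set, List.sum_set]
  have hsplit : (List.map (fun r => r.count false) v).sum
      = ((List.map (fun r => r.count false) v).take y).sum
        + v[y].count false
        + ((List.map (fun r => r.count false) v).drop (y + 1)).sum := by
    conv_lhs => rw [← List.take_append_drop y (List.map (fun r => r.count false) v)]
    rw [List.sum_append]
    rw [List.drop_eq_getElem_cons (by simpa using hylen)]
    simp only [List.sum_cons, List.getElem_map]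
    omega
  rw [hsplit]
  rw [if_pos (by simpa using hylen)]
  omega

theorem pvFCnt_le (n m : Nat) (v : List (List Bool)) (hv : pvSH n m v) :
    pvFCnt v ≤ n * m := by
  unfold pvFCnt
  have h1 : (v.map (fun r => r.count false)).sum ≤ (v.map (fun _ => m)).sum := by
    apply List.sum_le_sum
    intro r hr
    have h2 : r.count false ≤ r.length := List.count_le_length
    have h3 := hv.2 _ hr
    omega
  have h2 : (v.map (fun _ => m)).sum = v.length * m := by
    rw [List.map_const', List.sum_replicate, smul_eq_mul]
  rw [h2, hv.1] at h1
  exact h1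

def pvCast (c : Nat × Nat) : Int × Int := ((c.1 : Int), (c.2 : Int))

theorem pvVm_set (n m : Nat) (v : List (List Bool)) (hv : pvSH n m v) (e₀ : Nat × Nat)
    (h1 : e₀.1 < n) (h2 : e₀.2 < m) (e : Nat × Nat) :
    pvVm n m (pvVisSet v e₀.1 e₀.2) e ↔ (pvVm n m v e ∨ e = e₀) := by
  unfold pvVm
  by_cases hb : e.1 < n ∧ e.2 < m
  · rw [pvVisGet_set n m v hv e₀.1 e₀.2 h1 h2 e.1 e.2]
    by_cases he : e = e₀
    · subst he
      simp [hb.1, hb.2]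
    · have hne : ¬(e.1 = e₀.1 ∧ e.2 = e₀.2) := by
        intro hc
        exact he (Prod.ext hc.1 hc.2)
      rw [if_neg hne]
      constructor
      · rintro ⟨a, b, c⟩; exact Or.inl ⟨a, b, c⟩
      · rintro (⟨a, b, c⟩ | hc)
        · exact ⟨a, b, c⟩
        · exact absurd hc he
  · constructor
    · rintro ⟨a, b, _⟩; exact absurd ⟨a, b⟩ hb
    · rintro (⟨a, b, _⟩ | hc)
      · exact absurd ⟨a, b⟩ hb
      · subst hc; exact absurd ⟨h1, h2⟩ hb

theorem pvExpand (land : List (List Int)) (n m : Nat) (c : Nat × Nat) :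
    ∀ (ds : List (Int × Int)) (q : List (Nat × Nat)) (visit : List (List Bool)),
    pvSH n m visit →
    ∃ (news : List (Nat × Nat)) (visit' : List (List Bool)),
      ds.foldl (fun (s : List (Int × Int) × List (List Bool)) d =>
          let ny := (c.1 : Int) + d.1
          let nx := (c.2 : Int) + d.2
          if 0 ≤ ny ∧ ny < (n : Int) ∧ 0 ≤ nx ∧ nx < (m : Int) ∧
              pvVisGet s.2 ny.toNat nx.toNat = false ∧ pvCell land ny.toNat nx.toNat = 1
          then (s.1 ++ [(ny, nx)], pvVisSet s.2 ny.toNat nx.toNat)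
          else s) (q.map pvCast, visit)
        = ((q ++ news).map pvCast, visit') ∧
      pvSH n m visit' ∧ news.Nodup ∧
      (∀ e, e ∈ news ↔
        (∃ d ∈ ds, (e.1 : Int) = (c.1 : Int) + d.1 ∧ (e.2 : Int) = (c.2 : Int) + d.2) ∧
          pvOneP land n m e ∧ ¬ pvVm n m visit e) ∧
      (∀ e, pvVm n m visit' e ↔ (pvVm n m visit e ∨ e ∈ news)) ∧
      pvFCnt visit = pvFCnt visit' + news.length := by
  intro ds
  induction ds with
  | nil =>
      intro q visit hv
      refine ⟨[], visit, by simp, hv, by simp, ?_, by simp, by simp⟩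
      simp
  | cons d ds ih =>
      intro q visit hv
      rw [List.foldl_cons]
      by_cases hg : 0 ≤ (c.1 : Int) + d.1 ∧ (c.1 : Int) + d.1 < (n : Int) ∧
          0 ≤ (c.2 : Int) + d.2 ∧ (c.2 : Int) + d.2 < (m : Int) ∧
          pvVisGet visit ((c.1 : Int) + d.1).toNat ((c.2 : Int) + d.2).toNat = false ∧
          pvCell land ((c.1 : Int) + d.1).toNat ((c.2 : Int) + d.2).toNat = 1
      · -- the neighbour is taken
        obtain ⟨hg1, hg2, hg3, hg4, hg5, hg6⟩ := hg
        set e₀ : Nat × Nat := (((c.1 : Int) + d.1).toNat, ((c.2 : Int) + d.2).toNat) with he₀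
        have he01 : e₀.1 < n := by simp [he₀]; omega
        have he02 : e₀.2 < m := by simp [he₀]; omega
        have hcast : pvCast e₀ = ((c.1 : Int) + d.1, (c.2 : Int) + d.2) := by
          simp [pvCast, he₀]
          constructor <;> omega
        have hone : pvOneP land n m e₀ := ⟨he01, he02, hg6⟩
        have hnvm : ¬ pvVm n m visit e₀ := by
          intro hvm
          rw [hvm.2.2] at hg5
          exact absurd hg5 (by simp)
        have hv1 : pvSH n m (pvVisSet visit e₀.1 e₀.2) := pvSH_set n m visit hv e₀.1 e₀.2 he01
        have hstep : (if 0 ≤ (c.1 : Int) + d.1 ∧ (c.1 : Int) + d.1 < (n : Int) ∧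
              0 ≤ (c.2 : Int) + d.2 ∧ (c.2 : Int) + d.2 < (m : Int) ∧
              pvVisGet visit ((c.1 : Int) + d.1).toNat ((c.2 : Int) + d.2).toNat = false ∧
              pvCell land ((c.1 : Int) + d.1).toNat ((c.2 : Int) + d.2).toNat = 1
            then (q.map pvCast ++ [((c.1 : Int) + d.1, (c.2 : Int) + d.2)],
                pvVisSet visit ((c.1 : Int) + d.1).toNat ((c.2 : Int) + d.2).toNat)
            else (q.map pvCast, visit))
            = ((q ++ [e₀]).map pvCast, pvVisSet visit e₀.1 e₀.2) := by
          rw [if_pos ⟨hg1, hg2, hg3, hg4, hg5, hg6⟩, List.map_append]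
          simp only [List.map_cons, List.map_nil, hcast]
          rfl
        obtain ⟨news', visit', hfold, hsh', hnd', hmem', hvm', hfc'⟩ :=
          ih (q ++ [e₀]) (pvVisSet visit e₀.1 e₀.2) hv1
        refine ⟨e₀ :: news', visit', ?_, hsh', ?_, ?_, ?_, ?_⟩
        · simp only [hstep]
          rw [hfold]
          simp
        · -- nodup
          rw [List.nodup_cons]
          refine ⟨fun hmem => ?_, hnd'⟩
          have h := (hmem' e₀).mp hmem
          exact h.2.2 ((pvVm_set n m visit hv e₀ he01 he02 e₀).mpr (Or.inr rfl))
        · -- membership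
          intro e
          rw [List.mem_cons, hmem' e]
          constructor
          · rintro (rfl | ⟨⟨d', hd', hc1, hc2⟩, h2, h3⟩)
            · refine ⟨⟨d, List.mem_cons_self, ?_, ?_⟩, hone, hnvm⟩
              · simp [he₀]; omega
              · simp [he₀]; omega
            · refine ⟨⟨d', List.mem_cons_of_mem _ hd', hc1, hc2⟩, h2, ?_⟩
              intro hvm
              exact h3 ((pvVm_set n m visit hv e₀ he01 he02 e).mpr (Or.inl hvm))
          · rintro ⟨⟨d', hd', hc1, hc2⟩, h2, h3⟩
            by_cases he : e = e₀
            · exact Or.inl he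
            · rcases List.mem_cons.mp hd' with rfl | hd''
              · -- d' = d forces e = e₀
                exfalso
                apply he
                have : e.1 = e₀.1 ∧ e.2 = e₀.2 := by
                  constructor <;> [skip; skip] <;> simp [he₀] <;> omega
                exact Prod.ext this.1 this.2
              · refine Or.inr ⟨⟨d', hd'', hc1, hc2⟩, h2, ?_⟩
                rw [pvVm_set n m visit hv e₀ he01 he02 e]
                rintro (h | h)
                · exact h3 h
                · exact he h
        · -- visited set
          intro e
          rw [hvm' e, pvVm_set n m visit hv e₀ he01 he02 e, List.mem_cons]
          tauto
        · -- false count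
          have := pvFCnt_set n m visit hv e₀.1 e₀.2 he01 he02 (by
            have : pvVisGet visit e₀.1 e₀.2 = false := hg5
            exact this)
          rw [this, hfc']
          simp only [List.length_cons]
          omega
      · -- the neighbour is not taken
        rw [if_neg hg]
        obtain ⟨news', visit', hfold, hsh', hnd', hmem', hvm', hfc'⟩ := ih q visit hv
        refine ⟨news', visit', hfold, hsh', hnd', ?_, hvm', hfc'⟩
        intro e
        rw [hmem' e]
        constructor
        · rintro ⟨⟨d', hd', hc1, hc2⟩, h2, h3⟩
          exact ⟨⟨d', List.mem_cons_of_mem _ hd', hc1, hc2⟩, h2, h3⟩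
        · rintro ⟨⟨d', hd', hc1, hc2⟩, h2, h3⟩
          rcases List.mem_cons.mp hd' with rfl | hd''
          · exfalso
            apply hg
            have he1 : (c.1 : Int) + d'.1 = (e.1 : Int) := hc1.symm
            have he2 : (c.2 : Int) + d'.2 = (e.2 : Int) := hc2.symm
            obtain ⟨ho1, ho2, ho3⟩ := h2
            refine ⟨by omega, by omega, by omega, by omega, ?_, ?_⟩
            · have hte : ((c.1 : Int) + d'.1).toNat = e.1 ∧ ((c.2 : Int) + d'.2).toNat = e.2 := by
                constructor <;> omega
              rw [hte.1, hte.2]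
              by_cases hvg : pvVisGet visit e.1 e.2 = false
              · exact hvg
              · exact absurd ⟨ho1, ho2, by simpa using hvg⟩ h3
            · have hte : ((c.1 : Int) + d'.1).toNat = e.1 ∧ ((c.2 : Int) + d'.2).toNat = e.2 := by
                constructor <;> omega
              rw [hte.1, hte.2]
              exact ho3
          · exact ⟨⟨d', hd'', hc1, hc2⟩, h2, h3⟩

theorem pvAdj_iff_dir (land : List (List Int)) (n m : Nat) (c e : Nat × Nat)
    (hc : pvOneP land n m c) :
    pvAdjP land n m c e ↔
      (pvOneP land n m e ∧ ∃ d ∈ pvDirs,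
        (e.1 : Int) = (c.1 : Int) + d.1 ∧ (e.2 : Int) = (c.2 : Int) + d.2) := by
  constructor
  · rintro ⟨h1, h2, h3⟩
    refine ⟨h2, ?_⟩
    simp only [pvDirs, List.mem_cons, List.not_mem_nil, or_false]
    rcases h3 with ⟨hr, hs | hs⟩ | ⟨hr, hs | hs⟩
    · exact ⟨(0, 1), by tauto, by simp; omega⟩
    · exact ⟨(0, -1), by tauto, by simp; omega⟩
    · exact ⟨(1, 0), by tauto, by simp; omega⟩
    · exact ⟨(-1, 0), by tauto, by simp; omega⟩
  · rintro ⟨he, d, hd, h1, h2⟩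
    refine ⟨hc, he, ?_⟩
    simp only [pvDirs, List.mem_cons, List.not_mem_nil, or_false] at hd
    rcases hd with rfl | rfl | rfl | rfl <;> simp at h1 h2 <;> omega

theorem pvReach_not_V0 (land : List (List Int)) (n m : Nat) (V₀ : Nat × Nat → Prop)
    (hcl : ∀ a, V₀ a → ∀ b, pvAdjP land n m a b → V₀ b) (s e : Nat × Nat)
    (hs0 : ¬ V₀ s) (h : pvReachP land n m s e) : ¬ V₀ e := by
  induction h with
  | refl => exact hs0
  | tail hr hadj ih =>
      intro hV
      exact ih (hcl _ hV _ (pvAdjP_symm land n m hadj))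

theorem pvBfsLoop_nil (land : List (List Int)) (n m fuel : Nat)
    (visit : List (List Bool)) (cnt minX maxX : Int) :
    pvBfsLoop land n m fuel [] visit cnt minX maxX = (visit, cnt, minX, maxX) := by
  cases fuel <;> rfl

theorem pvBfsLoop_cons (land : List (List Int)) (n m fuel : Nat) (y x : Int)
    (q : List (Int × Int)) (visit : List (List Bool)) (cnt minX maxX : Int) :
    pvBfsLoop land n m (fuel + 1) ((y, x) :: q) visit cnt minX maxX
      = (let s := pvDirs.foldl (fun (s : List (Int × Int) × List (List Bool)) d =>
            let ny := y + d.1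
            let nx := x + d.2
            if 0 ≤ ny ∧ ny < (n : Int) ∧ 0 ≤ nx ∧ nx < (m : Int) ∧
                pvVisGet s.2 ny.toNat nx.toNat = false ∧ pvCell land ny.toNat nx.toNat = 1
            then (s.1 ++ [(ny, nx)], pvVisSet s.2 ny.toNat nx.toNat)
            else s) (q, visit)
         pvBfsLoop land n m fuel s.1 s.2 (cnt + 1) (min minX x) (max maxX x)) := rfl

set_option maxHeartbeats 2000000 in
theorem pvBfsLoop_spec (land : List (List Int)) (n m : Nat) (s : Nat × Nat)
    (V₀ : Nat × Nat → Prop)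
    (hcl : ∀ a, V₀ a → ∀ b, pvAdjP land n m a b → V₀ b)
    (hs0 : ¬ V₀ s) :
    ∀ (fuel : Nat) (qn π : List (Nat × Nat)) (visit : List (List Bool))
      (cnt minX maxX : Int),
      pvSH n m visit →
      2 * pvFCnt visit + qn.length ≤ fuel →
      (∀ e, pvVm n m visit e ↔ (V₀ e ∨ e ∈ qn ∨ e ∈ π)) →
      (qn ++ π).Nodup →
      (∀ e, e ∈ qn ++ π → pvOneP land n m e ∧ pvReachP land n m s e ∧ ¬ V₀ e) →
      (∀ e ∈ π, ∀ d, pvAdjP land n m e d → pvVm n m visit d) →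
      (s ∈ qn ∨ s ∈ π) →
      ∃ (πF : List (Nat × Nat)) (visitF : List (List Bool)),
        pvBfsLoop land n m fuel (qn.map pvCast) visit cnt minX maxX
          = (visitF, cnt + πF.length,
             πF.foldl (fun a d => min a (d.2 : Int)) minX,
             πF.foldl (fun a d => max a (d.2 : Int)) maxX) ∧
        pvSH n m visitF ∧ (π ++ πF).Nodup ∧
        (∀ e, (e ∈ π ∨ e ∈ πF) ↔ (pvOneP land n m e ∧ pvReachP land n m s e)) ∧
        (∀ e, pvVm n m visitF e ↔ (V₀ e ∨ e ∈ π ∨ e ∈ πF)) := by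
  intro fuel
  induction fuel with
  | zero =>
      intro qn π visit cnt minX maxX hsh hfuel hvm hnd hmem hclo hseed
      have hq : qn = [] := by
        cases qn with
        | nil => rfl
        | cons a l => simp at hfuel
      subst hq
      have key : ∀ e, pvReachP land n m s e → e ∈ π := by
        intro e hreach
        induction hreach with
        | refl => simpa using hseed
        | @tail b e' hr hadj ih2 =>
            have hb : b ∈ π := ih2
            have hvme' : pvVm n m visit e' := hclo b hb e' hadj
            have hne : ¬ V₀ e' := pvReach_not_V0 land n m V₀ hcl s e' hs0 (hr.tail hadj)
            have h := (hvm e').mp hvme'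
            simp only [List.not_mem_nil, false_or] at h
            tauto
      refine ⟨[], visit, by simp [pvBfsLoop_nil], hsh, by simpa using hnd, ?_, by simpa using hvm⟩
      intro e
      simp only [List.not_mem_nil, or_false]
      constructor
      · intro he
        have h := hmem e (by simpa using he)
        exact ⟨h.1, h.2.1⟩
      · rintro ⟨hone, hreach⟩
        exact key e hreach
  | succ fuel ih =>
      intro qn π visit cnt minX maxX hsh hfuel hvm hnd hmem hclo hseed
      cases qn with
      | nil =>
          -- same return as the zero case: loop exits on the empty queue
          have key : ∀ e, pvReachP land n m s e → e ∈ π := by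
            intro e hreach
            induction hreach with
            | refl => simpa using hseed
            | @tail b e' hr hadj ih2 =>
                have hb : b ∈ π := ih2
                have hvme' : pvVm n m visit e' := hclo b hb e' hadj
                have hne : ¬ V₀ e' := pvReach_not_V0 land n m V₀ hcl s e' hs0 (hr.tail hadj)
                have h := (hvm e').mp hvme'
                simp only [List.not_mem_nil, false_or] at h
                tauto
          refine ⟨[], visit, by simp [pvBfsLoop_nil], hsh, by simpa using hnd, ?_, by simpa using hvm⟩
          intro e
          simp only [List.not_mem_nil, or_false]
          constructor
          · intro he
            have h := hmem e (by simpa using he)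
            exact ⟨h.1, h.2.1⟩
          · rintro ⟨hone, hreach⟩
            exact key e hreach
      | cons c rest =>
          have hcq : c ∈ c :: rest := List.mem_cons_self
          have hcprop := hmem c (List.mem_append_left _ hcq)
          obtain ⟨honec, hreachc, hnV0c⟩ := hcprop
          -- expand the four neighbours
          obtain ⟨news, visit₁, hfold, hsh₁, hndnews, hmemnews, hvm₁, hfc₁⟩ :=
            pvExpand land n m c pvDirs rest visit hsh
          -- one loop iteration
          have hstep : pvBfsLoop land n m (fuel + 1) ((c :: rest).map pvCast) visit cnt minX maxX
              = pvBfsLoop land n m fuel ((rest ++ news).map pvCast) visit₁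
                  (cnt + 1) (min minX (c.2 : Int)) (max maxX (c.2 : Int)) := by
            simp only [List.map_cons]
            rw [show pvCast c = ((c.1 : Int), (c.2 : Int)) from rfl,
              pvBfsLoop_cons land n m fuel (c.1 : Int) (c.2 : Int) (rest.map pvCast) visit cnt minX maxX]
            rw [hfold]
          -- facts about news
          have hnews_adj : ∀ e ∈ news, pvAdjP land n m c e ∧ ¬ pvVm n m visit e := by
            intro e he
            have h := (hmemnews e).mp he
            exact ⟨(pvAdj_iff_dir land n m c e honec).mpr ⟨h.2.1, h.1⟩, h.2.2⟩
          have hsub_vm : ∀ e, (e ∈ c :: rest ∨ e ∈ π) → pvVm n m visit e := by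
            intro e he
            exact (hvm e).mpr (by tauto)
          -- invariants for the recursive call
          have hvm' : ∀ e, pvVm n m visit₁ e ↔ (V₀ e ∨ e ∈ rest ++ news ∨ e ∈ π ++ [c]) := by
            intro e
            rw [hvm₁ e, hvm e]
            simp only [List.mem_append, List.mem_cons, List.mem_singleton]
            tauto
          have hnd' : ((rest ++ news) ++ (π ++ [c])).Nodup := by
            have h0 : c ∉ rest ++ π ∧ (rest ++ π).Nodup := by
              rw [List.cons_append, List.nodup_cons] at hnd
              exact hnd
            have hrest : rest.Nodup := (List.nodup_append.mp h0.2).1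
            have hπ : π.Nodup := (List.nodup_append.mp h0.2).2.1
            have hsep : ∀ a ∈ rest, ∀ b ∈ π, a ≠ b := (List.nodup_append.mp h0.2).2.2
            have hnews_old : ∀ e ∈ news, ¬ pvVm n m visit e :=
              fun e he => ((hmemnews e).mp he).2.2
            rw [List.nodup_append]
            refine ⟨?_, ?_, ?_⟩
            · rw [List.nodup_append]
              refine ⟨hrest, hndnews, ?_⟩
              intro a ha b hb hab
              subst hab
              exact hnews_old a hb (hsub_vm a (Or.inl (List.mem_cons_of_mem _ ha)))
            · rw [List.nodup_append]
              refine ⟨hπ, List.nodup_singleton c, ?_⟩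
              intro a ha b hb hab
              subst hab
              simp only [List.mem_singleton] at hb
              subst hb
              exact h0.1 (List.mem_append_right _ ha)
            · intro a ha b hb hab
              subst hab
              rcases List.mem_append.mp ha with ha | ha
              · rcases List.mem_append.mp hb with hb | hb
                · exact hsep a ha a hb rfl
                · simp only [List.mem_singleton] at hb
                  subst hb
                  exact h0.1 (List.mem_append_left _ ha)
              · rcases List.mem_append.mp hb with hb | hb
                · exact hnews_old a ha (hsub_vm a (Or.inr hb))
                · simp only [List.mem_singleton] at hb
                  subst hb
                  exact hnews_old a ha (hsub_vm a (Or.inl hcq))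
          have hmem' : ∀ e, e ∈ (rest ++ news) ++ (π ++ [c]) →
              pvOneP land n m e ∧ pvReachP land n m s e ∧ ¬ V₀ e := by
            intro e he
            rcases List.mem_append.mp he with he | he
            · rcases List.mem_append.mp he with he | he
              · exact hmem e (List.mem_append_left _ (List.mem_cons_of_mem _ he))
              · have h := hnews_adj e he
                have hone := ((hmemnews e).mp he).2.1
                have hreach : pvReachP land n m s e := hreachc.tail h.1
                exact ⟨hone, hreach, pvReach_not_V0 land n m V₀ hcl s e hs0 hreach⟩
            · rcases List.mem_append.mp he with he | he
              · exact hmem e (List.mem_append_right _ he)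
              · simp only [List.mem_singleton] at he
                subst he
                exact ⟨honec, hreachc, hnV0c⟩
          have hclo' : ∀ e ∈ π ++ [c], ∀ d, pvAdjP land n m e d → pvVm n m visit₁ d := by
            intro e he d hadj
            rcases List.mem_append.mp he with he | he
            · exact (hvm₁ d).mpr (Or.inl (hclo e he d hadj))
            · simp only [List.mem_singleton] at he
              subst he
              by_cases hvd : pvVm n m visit d
              · exact (hvm₁ d).mpr (Or.inl hvd)
              · refine (hvm₁ d).mpr (Or.inr ?_)
                rw [hmemnews d]
                have h := (pvAdj_iff_dir land n m e d honec).mp hadj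
                exact ⟨h.2, h.1, hvd⟩
          have hseed' : s ∈ rest ++ news ∨ s ∈ π ++ [c] := by
            rcases hseed with h | h
            · rcases List.mem_cons.mp h with h | h
              · subst h; exact Or.inr (List.mem_append_right _ (List.mem_singleton.mpr rfl))
              · exact Or.inl (List.mem_append_left _ h)
            · exact Or.inr (List.mem_append_left _ h)
          have hfuel' : 2 * pvFCnt visit₁ + (rest ++ news).length ≤ fuel := by
            simp only [List.length_append]
            simp only [List.length_cons] at hfuel
            omega
          obtain ⟨πF', visitF, heq, hshF, hndF, hmemF, hvmF⟩ :=
            ih (rest ++ news) (π ++ [c]) visit₁ (cnt + 1)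
              (min minX (c.2 : Int)) (max maxX (c.2 : Int))
              hsh₁ hfuel' hvm' hnd' hmem' hclo' hseed'
          refine ⟨c :: πF', visitF, ?_, hshF, ?_, ?_, ?_⟩
          · rw [hstep, heq]
            simp only [List.foldl_cons, List.length_cons]
            congr 1
            push_cast
            ring
          · have h := hndF
            rw [List.append_assoc] at h
            simpa using h
          · intro e
            have h := hmemF e
            simp only [List.mem_append, List.mem_singleton, List.mem_cons] at h ⊢
            tauto
          · intro e
            have h := hvmF e
            simp only [List.mem_append, List.mem_singleton, List.mem_cons] at h ⊢
            tauto

theorem pvBfs_spec (land : List (List Int)) (n m : Nat) (s : Nat × Nat)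
    (visit : List (List Bool)) (hsh : pvSH n m visit)
    (hcl : ∀ a, pvVm n m visit a → ∀ b, pvAdjP land n m a b → pvVm n m visit b)
    (hone : pvOneP land n m s) (hnv : ¬ pvVm n m visit s) :
    ∃ (πF : List (Nat × Nat)) (visitF : List (List Bool)),
      pvBfs land n m s.1 s.2 visit
        = (visitF, (πF.length : Int),
           πF.foldl (fun a d => min a (d.2 : Int)) 501,
           πF.foldl (fun a d => max a (d.2 : Int)) 0) ∧
      pvSH n m visitF ∧ πF.Nodup ∧
      (∀ e, e ∈ πF ↔ (pvOneP land n m e ∧ pvReachP land n m s e)) ∧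
      (∀ e, pvVm n m visitF e ↔ (pvVm n m visit e ∨ e ∈ πF)) := by
  have h1 : s.1 < n := hone.1
  have h2 : s.2 < m := hone.2.1
  have hget : pvVisGet visit s.1 s.2 = false := by
    by_cases h : pvVisGet visit s.1 s.2 = false
    · exact h
    · exact absurd ⟨h1, h2, by simpa using h⟩ hnv
  have hsh₁ : pvSH n m (pvVisSet visit s.1 s.2) := pvSH_set n m visit hsh s.1 s.2 h1
  have hfc : pvFCnt visit = pvFCnt (pvVisSet visit s.1 s.2) + 1 :=
    pvFCnt_set n m visit hsh s.1 s.2 h1 h2 hget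
  have hfcle : pvFCnt visit ≤ n * m := pvFCnt_le n m visit hsh
  obtain ⟨πF, visitF, heq, hshF, hndF, hmemF, hvmF⟩ :=
    pvBfsLoop_spec land n m s (pvVm n m visit) hcl hnv (2 * (n * m) + 1)
      [s] [] (pvVisSet visit s.1 s.2) 0 501 0 hsh₁
      (by simp only [List.length_singleton]; omega)
      (by
        intro e
        rw [pvVm_set n m visit hsh s h1 h2 e]
        simp)
      (by simp)
      (by
        intro e he
        simp only [List.append_nil, List.mem_singleton] at he
        subst he
        exact ⟨hone, Relation.ReflTransGen.refl, hnv⟩)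
      (by simp)
      (by simp)
  refine ⟨πF, visitF, ?_, hshF, by simpa using hndF, by simpa using hmemF, ?_⟩
  · unfold pvBfs
    have hmap : [s].map pvCast = [((s.1 : Int), (s.2 : Int))] := rfl
    rw [← hmap, heq]
    simp
  · intro e
    simpa using hvmF e

theorem mem_pvMembersC (land : List (List Int)) (n m : Nat) (c e : Nat × Nat) :
    e ∈ pvMembersC land n m c ↔ (pvOneP land n m e ∧ pvReachP land n m c e) := by
  unfold pvMembersC
  rw [List.mem_filter]
  rw [@decide_eq_true_iff _ (Classical.propDecidable _)]
  constructor
  · tauto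
  · intro h
    exact ⟨(mem_pvScanL n m e).mpr ⟨h.1.1, h.1.2.1⟩, h⟩

theorem nodup_pvMembersC (land : List (List Int)) (n m : Nat) (hm0 : 0 < m) (c : Nat × Nat) :
    (pvMembersC land n m c).Nodup :=
  (pvScanL_nodup n m hm0).filter _

theorem pvGuard_iff (land : List (List Int)) (n m : Nat) (v : List (List Bool))
    (hv : pvSH n m v) (e : Nat × Nat) (h1 : e.1 < n) (h2 : e.2 < m) :
    (pvVisGet v e.1 e.2 = false ∧ pvCell land e.1 e.2 = 1)
      ↔ (¬ pvVm n m v e ∧ pvOneP land n m e) := by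
  constructor
  · rintro ⟨hg, hc⟩
    refine ⟨?_, h1, h2, hc⟩
    rintro ⟨_, _, hget⟩
    rw [hget] at hg
    exact absurd hg (by simp)
  · rintro ⟨hnv, hone⟩
    refine ⟨?_, hone.2.2⟩
    by_cases h : pvVisGet v e.1 e.2 = false
    · exact h
    · exact absurd ⟨h1, h2, by simpa using h⟩ hnv

theorem pvAOuter (land : List (List Int)) (n m : Nat) (hm0 : 0 < m) :
    ((pvScanL n m).foldl (fun (st : List Int × List (List Bool)) c =>
        if pvVisGet st.2 c.1 c.2 = false ∧ pvCell land c.1 c.2 = 1 then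
          let r := pvBfs land n m c.1 c.2 st.2
          (pvAddRange st.1 r.2.2.1 r.2.2.2 r.2.1, r.1)
        else st)
      (List.replicate m 0, List.replicate n (List.replicate m false))).1
    = pvAnsC land n m := by
  -- invariant-based induction over the scan
  have h := pvFoldlInd (pvScanL n m)
    (fun (st : List Int × List (List Bool)) c =>
        if pvVisGet st.2 c.1 c.2 = false ∧ pvCell land c.1 c.2 = 1 then
          let r := pvBfs land n m c.1 c.2 st.2
          (pvAddRange st.1 r.2.2.1 r.2.2.2 r.2.1, r.1)
        else st)
    (List.replicate m 0, List.replicate n (List.replicate m false))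
    (fun pre st =>
      pvSH n m st.2 ∧
      (∀ c, pvVm n m st.2 c ↔ (pvOneP land n m c ∧
          ∃ p ∈ pre, pvOneP land n m p ∧ pvReachP land n m p c)) ∧
      st.1 = (pre.filter (fun c =>
            @decide _ (Classical.propDecidable (pvIsRootP land n m c)))).foldl
          (fun a c => pvAddRange a (pvLoC land n m c) (pvHiC land n m c) (pvCntC land n m c))
          (List.replicate m 0))
    ⟨pvSH_replicate n m, by
        intro c
        constructor
        · rintro ⟨_, _, hget⟩
          rw [pvVisGet_replicate] at hget
          exact absurd hget (by simp)
        · rintro ⟨_, p, hp, _⟩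
          simp at hp
      , by simp⟩
    ?_
  · exact h.2.2.trans rfl
  · -- the step
    rintro pre e suf ⟨ans, visit⟩ hdec ⟨hsh, hvm, hans⟩
    beta_reduce
    have hescan : e ∈ pvScanL n m := by rw [hdec]; simp
    have he1 : e.1 < n := ((mem_pvScanL n m e).mp hescan).1
    have he2 : e.2 < m := ((mem_pvScanL n m e).mp hescan).2
    have hprefix := pvScanL_prefix_mem n m hm0 pre suf e hdec
    by_cases hone : pvOneP land n m e
    · by_cases hvme : pvVm n m visit e
      · -- already visited: A does nothing, e is not a root
        rw [if_neg (by
          rw [pvGuard_iff land n m visit hsh e he1 he2]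
          tauto)]
        obtain ⟨_, p, hp, hpone, hpreach⟩ := (hvm e).mp hvme
        refine ⟨hsh, ?_, ?_⟩
        · intro c
          rw [hvm c]
          constructor
          · rintro ⟨hc, q, hq, h⟩
            exact ⟨hc, q, List.mem_append_left _ hq, h⟩
          · rintro ⟨hc, q, hq, hqone, hqreach⟩
            rcases List.mem_append.mp hq with hq | hq
            · exact ⟨hc, q, hq, hqone, hqreach⟩
            · simp only [List.mem_singleton] at hq
              subst hq
              exact ⟨hc, p, hp, hpone, hpreach.trans hqreach⟩
        · rw [List.filter_append, hans]
          have hnr : ¬ pvIsRootP land n m e := by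
            rintro ⟨_, hmin⟩
            have hplt : pvIdx m p < pvIdx m e := ((hprefix p).mp hp).2.2
            have := hmin p (pvReachP_symm land n m hpreach)
            omega
          have hdec_e : (@decide (pvIsRootP land n m e) (Classical.propDecidable _)) = false := by
            rw [@decide_eq_false_iff_not _ (Classical.propDecidable _)]
            exact hnr
          simp [hdec_e]
      · -- new component: flood it
        have hcl : ∀ a, pvVm n m visit a → ∀ b, pvAdjP land n m a b → pvVm n m visit b := by
          intro a ha b hadj
          obtain ⟨_, p, hp, hpone, hpreach⟩ := (hvm a).mp ha
          exact (hvm b).mpr ⟨hadj.2.1, p, hp, hpone, hpreach.tail hadj⟩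
        obtain ⟨πF, visitF, heq, hshF, hndF, hmemF, hvmF⟩ :=
          pvBfs_spec land n m e visit hsh hcl hone hvme
        rw [if_pos (by
          rw [pvGuard_iff land n m visit hsh e he1 he2]
          exact ⟨hvme, hone⟩)]
        rw [heq]
        refine ⟨hshF, ?_, ?_⟩
        · intro c
          rw [hvmF c, hvm c, hmemF c]
          constructor
          · rintro (⟨hc, q, hq, h⟩ | ⟨hc, hreach⟩)
            · exact ⟨hc, q, List.mem_append_left _ hq, h⟩
            · exact ⟨hc, e, List.mem_append_right _ (List.mem_singleton.mpr rfl), hone, hreach⟩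
          · rintro ⟨hc, q, hq, hqone, hqreach⟩
            rcases List.mem_append.mp hq with hq | hq
            · exact Or.inl ⟨hc, q, hq, hqone, hqreach⟩
            · simp only [List.mem_singleton] at hq
              subst hq
              exact Or.inr ⟨hc, hqreach⟩
        · -- the answer list gains e's component contribution
          have hroot : pvIsRootP land n m e := by
            refine ⟨hone, ?_⟩
            intro d hreach
            by_contra hlt
            have hd : d ∈ pre := (hprefix d).mpr
              ⟨(pvReachP_one_right land n m hone hreach).1,
               (pvReachP_one_right land n m hone hreach).2.1, by omega⟩
            exact hvme ((hvm e).mpr ⟨hone, d, hd,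
              pvReachP_one_right land n m hone hreach,
              pvReachP_symm land n m hreach⟩)
          have hperm : πF.Perm (pvMembersC land n m e) := by
            rw [List.perm_ext_iff_of_nodup hndF (nodup_pvMembersC land n m hm0 e)]
            intro d
            rw [hmemF d, mem_pvMembersC land n m e d]
          have hlen : πF.length = (pvMembersC land n m e).length := hperm.length_eq
          have hmin : πF.foldl (fun a d => min a (d.2 : Int)) 501 = pvLoC land n m e := by
            unfold pvLoC
            letI : RightCommutative (fun (a : Int) (d : Nat × Nat) => min a (d.2 : Int)) :=
              ⟨fun b a1 a2 => by omega⟩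
            exact hperm.foldl_eq 501
          have hmax : πF.foldl (fun a d => max a (d.2 : Int)) 0 = pvHiC land n m e := by
            unfold pvHiC
            letI : RightCommutative (fun (a : Int) (d : Nat × Nat) => max a (d.2 : Int)) :=
              ⟨fun b a1 a2 => by omega⟩
            exact hperm.foldl_eq 0
          rw [List.filter_append, hans]
          have hdec_e : (@decide (pvIsRootP land n m e) (Classical.propDecidable _)) = true := by
            rw [@decide_eq_true_iff _ (Classical.propDecidable _)]
            exact hroot
          rw [show List.filter (fun c =>
                @decide _ (Classical.propDecidable (pvIsRootP land n m c))) [e] = [e] by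
            simp [List.filter_cons, hdec_e]]
          rw [List.foldl_append]
          simp only [List.foldl_cons, List.foldl_nil]
          rw [hmin, hmax]
          unfold pvCntC
          rw [hlen]
    · -- not an oil cell: nothing happens
      rw [if_neg (by
        rw [pvGuard_iff land n m visit hsh e he1 he2]
        tauto)]
      refine ⟨hsh, ?_, ?_⟩
      · intro c
        rw [hvm c]
        constructor
        · rintro ⟨hc, q, hq, h⟩
          exact ⟨hc, q, List.mem_append_left _ hq, h⟩
        · rintro ⟨hc, q, hq, hqone, hqreach⟩
          rcases List.mem_append.mp hq with hq | hq
          · exact ⟨hc, q, hq, hqone, hqreach⟩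
          · simp only [List.mem_singleton] at hq
            subst hq
            exact absurd hqone hone
      · rw [List.filter_append, hans]
        have hnr : ¬ pvIsRootP land n m e := fun hr => hone hr.1
        have hdec_e : (@decide (pvIsRootP land n m e) (Classical.propDecidable _)) = false := by
          rw [@decide_eq_false_iff_not _ (Classical.propDecidable _)]
          exact hnr
        simp [hdec_e]

theorem pvA_main (land : List (List Int)) (hm0 : 0 < (land.getD 0 []).length) :
    solution land
      = (PySem.List.max? (pvAnsC land land.length (land.getD 0 []).length)
          (fun v => v)).getD 0 := by
  have hb := pvFoldlScan land.length (land.getD 0 []).length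
    (fun (st : List Int × List (List Bool)) c =>
      if pvVisGet st.2 c.1 c.2 = false ∧ pvCell land c.1 c.2 = 1 then
        let r := pvBfs land land.length (land.getD 0 []).length c.1 c.2 st.2
        (pvAddRange st.1 r.2.2.1 r.2.2.2 r.2.1, r.1)
      else st)
    (List.replicate (land.getD 0 []).length 0,
     List.replicate land.length (List.replicate (land.getD 0 []).length false))
  have hstep : solution land
      = (PySem.List.max? ((pvScanL land.length (land.getD 0 []).length).foldl
          (fun (st : List Int × List (List Bool)) c =>
            if pvVisGet st.2 c.1 c.2 = false ∧ pvCell land c.1 c.2 = 1 then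
              let r := pvBfs land land.length (land.getD 0 []).length c.1 c.2 st.2
              (pvAddRange st.1 r.2.2.1 r.2.2.2 r.2.1, r.1)
            else st)
          (List.replicate (land.getD 0 []).length 0,
           List.replicate land.length (List.replicate (land.getD 0 []).length false))).1
          (fun v => v)).getD 0 := by
    rw [hb]
    rfl
  rw [hstep, pvAOuter land land.length (land.getD 0 []).length hm0]

-- canonical DSU root: follow strictly decreasing parent pointers
def pvRootT (P : List Nat) (i : Nat) : Nat :=
  if h : P.getD i i < i then pvRootT P (P.getD i i) else i
termination_by i

-- adjacency on flattened indices
def pvREI (land : List (List Int)) (n m : Nat) : Nat → Nat → Prop :=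
  Relation.EqvGen (fun i j => pvAdjP land n m (i / m, i % m) (j / m, j % m))

def pvDecP (P : List Nat) : Prop := ∀ j, P.getD j j ≤ j

def pvSoundP (land : List (List Int)) (n m : Nat) (P : List Nat) : Prop :=
  ∀ i, pvREI land n m (P.getD i i) i

theorem pvIdx_div (m : Nat) (c : Nat × Nat) (h : c.2 < m) :
    pvIdx m c / m = c.1 ∧ pvIdx m c % m = c.2 := by
  unfold pvIdx
  constructor
  · rw [Nat.mul_comm, Nat.mul_add_div (by omega), Nat.div_eq_of_lt h]
    omega
  · rw [Nat.mul_comm, Nat.mul_add_mod, Nat.mod_eq_of_lt h]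

theorem pvIdx_inj (m : Nat) (c d : Nat × Nat) (hc : c.2 < m) (hd : d.2 < m)
    (h : pvIdx m c = pvIdx m d) : c = d := by
  have h1 := pvIdx_div m c hc
  have h2 := pvIdx_div m d hd
  rw [h] at h1
  exact Prod.ext (by omega) (by omega)

theorem pvFind_eq_rootT (P : List Nat) (hdec : pvDecP P) :
    ∀ (fuel i : Nat), i < fuel → pvFind P fuel i = pvRootT P i := by
  intro fuel
  induction fuel with
  | zero => intro i h; omega
  | succ fuel ih =>
      intro i h
      show (let p := P.getD i i; if p = i then i else pvFind P fuel p) = pvRootT P i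
      rw [pvRootT]
      by_cases hp : P.getD i i = i
      · rw [if_pos hp, dif_neg (by omega)]
      · have hlt : P.getD i i < i := lt_of_le_of_ne (hdec i) hp
        rw [dif_pos hlt]
        simp only [if_neg hp]
        exact ih (P.getD i i) (by omega)

theorem pvRootT_le (P : List Nat) (i : Nat) : pvRootT P i ≤ i := by
  induction i using Nat.strong_induction_on with
  | _ i ih =>
      rw [pvRootT]
      split_ifs with h
      · exact le_trans (ih _ h) (le_of_lt h)
      · exact le_refl i

theorem pvRootT_fix (P : List Nat) (hdec : pvDecP P) (i : Nat) :
    P.getD (pvRootT P i) (pvRootT P i) = pvRootT P i := by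
  induction i using Nat.strong_induction_on with
  | _ i ih =>
      rw [pvRootT]
      split_ifs with h
      · exact ih _ h
      · exact le_antisymm (hdec i) (le_of_not_gt h)

theorem pvRootT_of_fix (P : List Nat) (i : Nat) (h : P.getD i i = i) : pvRootT P i = i := by
  rw [pvRootT, dif_neg (by omega)]

theorem pvRootT_rei (land : List (List Int)) (n m : Nat) (P : List Nat)
    (hsound : pvSoundP land n m P) (i : Nat) : pvREI land n m (pvRootT P i) i := by
  induction i using Nat.strong_induction_on with
  | _ i ih =>
      rw [pvRootT]
      split_ifs with h
      · exact Relation.EqvGen.trans _ _ _ (ih _ h) (hsound i)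
      · exact Relation.EqvGen.refl i

theorem pvRootT_set (P : List Nat) (hdec : pvDecP P) (ra rb : Nat)
    (hlt : ra < rb) (hrb : P.getD rb rb = rb) (hra : P.getD ra ra = ra)
    (hlen : rb < P.length) :
    ∀ j, pvRootT (P.set rb ra) j = if pvRootT P j = rb then ra else pvRootT P j := by
  have hget : ∀ j, (P.set rb ra).getD j j = if j = rb then ra else P.getD j j := by
    intro j
    by_cases h : j = rb
    · subst h
      rw [if_pos rfl, List.getD_eq_getElem _ _ (by simpa using hlen),
        List.getElem_set_self (by simpa using hlen)]
    · rw [if_neg h]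
      by_cases hj : j < P.length
      · rw [List.getD_eq_getElem _ _ (by simpa using hj),
          List.getElem_set_ne (by omega) (by simpa using hj),
          List.getD_eq_getElem _ _ hj]
      · rw [List.getD_eq_default _ _ (by simpa using Nat.le_of_not_lt hj),
          List.getD_eq_default _ _ (Nat.le_of_not_lt hj)]
  intro j
  induction j using Nat.strong_induction_on with
  | _ j ih =>
      by_cases hjrb : j = rb
      · rw [hjrb]
        rw [pvRootT_of_fix P _ hrb, if_pos rfl]
        rw [pvRootT]
        rw [dif_pos (by rw [hget rb]; simp [hlt])]
        rw [hget rb]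
        simp only [if_pos rfl]
        have hra' : (P.set rb ra).getD ra ra = ra := by
          rw [hget ra, if_neg (by omega)]
          exact hra
        exact pvRootT_of_fix _ _ hra'
      · have hgj : (P.set rb ra).getD j j = P.getD j j := by rw [hget j, if_neg hjrb]
        by_cases hpj : P.getD j j < j
        · have h1 : pvRootT (P.set rb ra) j = pvRootT (P.set rb ra) (P.getD j j) := by
            rw [pvRootT]
            rw [dif_pos (by rw [hgj]; exact hpj)]
            rw [hgj]
          have h2 : pvRootT P j = pvRootT P (P.getD j j) := by
            rw [pvRootT, dif_pos hpj]
          rw [h1, h2]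
          exact ih _ hpj
        · have h1 : pvRootT (P.set rb ra) j = j := by
            rw [pvRootT]
            rw [dif_neg (by rw [hgj]; exact hpj)]
          have h2 : pvRootT P j = j := by
            rw [pvRootT, dif_neg hpj]
          rw [h1, h2, if_neg hjrb]

theorem pvDecP_set (P : List Nat) (hdec : pvDecP P) (ra rb : Nat) (hlt : ra < rb)
    (hlen : rb < P.length) : pvDecP (P.set rb ra) := by
  intro j
  by_cases h : j = rb
  · subst h
    rw [List.getD_eq_getElem _ _ (by simpa using hlen),
      List.getElem_set_self (by simpa using hlen)]
    omega
  · by_cases hj : j < P.length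
    · rw [List.getD_eq_getElem _ _ (by simpa using hj),
        List.getElem_set_ne (by omega) (by simpa using hj),
        ← List.getD_eq_getElem P j hj]
      exact hdec j
    · rw [List.getD_eq_default _ _ (by simpa using Nat.le_of_not_lt hj)]

theorem pvSoundP_set (land : List (List Int)) (n m : Nat) (P : List Nat)
    (hsound : pvSoundP land n m P) (ra rb : Nat) (hra : pvREI land n m ra rb)
    (hlen : rb < P.length) : pvSoundP land n m (P.set rb ra) := by
  intro i
  by_cases h : i = rb
  · subst h
    rw [List.getD_eq_getElem _ _ (by simpa using hlen),
      List.getElem_set_self (by simpa using hlen)]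
    exact hra
  · by_cases hi : i < P.length
    · rw [List.getD_eq_getElem _ _ (by simpa using hi),
        List.getElem_set_ne (by omega) (by simpa using hi),
        ← List.getD_eq_getElem P i hi]
      exact hsound i
    · rw [List.getD_eq_default _ _ (by simpa using Nat.le_of_not_lt hi)]
      exact Relation.EqvGen.refl i

theorem pvUnion_spec (land : List (List Int)) (n m : Nat) (P : List Nat) (a b : Nat)
    (hlen : P.length = n * m) (hdec : pvDecP P) (hsound : pvSoundP land n m P)
    (ha : a < n * m) (hb : b < n * m) (hedge : pvREI land n m a b) :
    (pvUnion P (n * m) a b).length = n * m ∧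
    pvDecP (pvUnion P (n * m) a b) ∧
    pvSoundP land n m (pvUnion P (n * m) a b) ∧
    pvRootT (pvUnion P (n * m) a b) a = pvRootT (pvUnion P (n * m) a b) b ∧
    (∀ i j, pvRootT P i = pvRootT P j →
      pvRootT (pvUnion P (n * m) a b) i = pvRootT (pvUnion P (n * m) a b) j) := by
  have hfa : pvFind P (n * m) a = pvRootT P a := pvFind_eq_rootT P hdec (n * m) a ha
  have hfb : pvFind P (n * m) b = pvRootT P b := pvFind_eq_rootT P hdec (n * m) b hb
  have hfixa : P.getD (pvRootT P a) (pvRootT P a) = pvRootT P a := pvRootT_fix P hdec a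
  have hfixb : P.getD (pvRootT P b) (pvRootT P b) = pvRootT P b := pvRootT_fix P hdec b
  have hreia : pvREI land n m (pvRootT P a) b :=
    Relation.EqvGen.trans _ _ _ (pvRootT_rei land n m P hsound a) hedge
  have hrei : pvREI land n m (pvRootT P a) (pvRootT P b) :=
    Relation.EqvGen.trans _ _ _ hreia
      (Relation.EqvGen.symm _ _ (pvRootT_rei land n m P hsound b))
  have hra_lt : pvRootT P a < n * m := lt_of_le_of_lt (pvRootT_le P a) ha
  have hrb_lt : pvRootT P b < n * m := lt_of_le_of_lt (pvRootT_le P b) hb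
  unfold pvUnion
  rw [hfa, hfb]
  by_cases heq : pvRootT P a = pvRootT P b
  · rw [if_pos heq]
    exact ⟨hlen, hdec, hsound, heq, fun i j h => h⟩
  · rw [if_neg heq]
    by_cases hlt : pvRootT P a < pvRootT P b
    · rw [if_pos hlt]
      have hroots := pvRootT_set P hdec (pvRootT P a) (pvRootT P b) hlt hfixb hfixa
        (by omega)
      refine ⟨by rw [List.length_set]; exact hlen,
        pvDecP_set P hdec _ _ hlt (by omega),
        pvSoundP_set land n m P hsound _ _ hrei (by omega), ?_, ?_⟩
      · rw [hroots a, hroots b, if_neg heq, if_pos rfl]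
      · intro i j h
        rw [hroots i, hroots j, h]
    · rw [if_neg hlt]
      have hlt' : pvRootT P b < pvRootT P a := by omega
      have hroots := pvRootT_set P hdec (pvRootT P b) (pvRootT P a) hlt' hfixa hfixb
        (by omega)
      refine ⟨by rw [List.length_set]; exact hlen,
        pvDecP_set P hdec _ _ hlt' (by omega),
        pvSoundP_set land n m P hsound _ _ (Relation.EqvGen.symm _ _ hrei) (by omega),
        ?_, ?_⟩
      · rw [hroots a, hroots b, if_pos rfl, if_neg (fun hc => heq hc.symm)]
      · intro i j h
        rw [hroots i, hroots j, h]

def pvStepEdge (land : List (List Int)) (n m : Nat) (c d : Nat × Nat) : Prop :=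
  pvAdjP land n m c d ∧ ((d.1 = c.1 ∧ d.2 = c.2 + 1) ∨ (d.1 = c.1 + 1 ∧ d.2 = c.2))

theorem pvCellEq (land : List (List Int)) (n m : Nat) (c : Nat × Nat) (h : c.2 < m) :
    ((pvIdx m c / m : Nat), (pvIdx m c % m : Nat)) = c := by
  have h1 := pvIdx_div m c h
  exact Prod.ext h1.1 h1.2

theorem pvREI_of_adj (land : List (List Int)) (n m : Nat) (c d : Nat × Nat)
    (hc : c.2 < m) (hd : d.2 < m) (hadj : pvAdjP land n m c d) :
    pvREI land n m (pvIdx m c) (pvIdx m d) := by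
  apply Relation.EqvGen.rel
  rw [show ((pvIdx m c / m : Nat), (pvIdx m c % m : Nat)) = c from pvCellEq land n m c hc,
    show ((pvIdx m d / m : Nat), (pvIdx m d % m : Nat)) = d from pvCellEq land n m d hd]
  exact hadj

theorem pvIdx_lt (n m : Nat) (c : Nat × Nat) (h1 : c.1 < n) (h2 : c.2 < m) :
    pvIdx m c < n * m := by
  unfold pvIdx
  calc c.1 * m + c.2 < c.1 * m + m := by omega
    _ = (c.1 + 1) * m := by ring
    _ ≤ n * m := Nat.mul_le_mul_right m (by omega)

theorem pvBuild_spec (land : List (List Int)) (n m : Nat) (hm0 : 0 < m) :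
    (pvBuildParent land n m).length = n * m ∧
    pvDecP (pvBuildParent land n m) ∧
    pvSoundP land n m (pvBuildParent land n m) ∧
    (∀ c d, pvAdjP land n m c d →
      pvRootT (pvBuildParent land n m) (pvIdx m c)
        = pvRootT (pvBuildParent land n m) (pvIdx m d)) := by
  have hrange : ∀ j, (List.range (n * m)).getD j j = j := by
    intro j
    by_cases h : j < n * m
    · rw [List.getD_eq_getElem _ _ (by simpa using h), List.getElem_range]
    · exact List.getD_eq_default _ _ (by simpa using Nat.le_of_not_lt h)
  have hb : pvBuildParent land n m = (pvScanL n m).foldl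
      (fun (par : List Nat) c =>
        if pvCell land c.1 c.2 = 1 then
          let i := c.1 * m + c.2
          let par1 := if c.2 + 1 < m ∧ pvCell land c.1 (c.2 + 1) = 1
            then pvUnion par (n * m) i (i + 1) else par
          if c.1 + 1 < n ∧ pvCell land (c.1 + 1) c.2 = 1
            then pvUnion par1 (n * m) i (i + m) else par1
        else par)
      (List.range (n * m)) := by
    rw [pvFoldlScan]
    rfl
  have hQ := pvFoldlInd (pvScanL n m)
    (fun (par : List Nat) c =>
        if pvCell land c.1 c.2 = 1 then
          let i := c.1 * m + c.2
          let par1 := if c.2 + 1 < m ∧ pvCell land c.1 (c.2 + 1) = 1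
            then pvUnion par (n * m) i (i + 1) else par
          if c.1 + 1 < n ∧ pvCell land (c.1 + 1) c.2 = 1
            then pvUnion par1 (n * m) i (i + m) else par1
        else par)
    (List.range (n * m))
    (fun pre par =>
      par.length = n * m ∧ pvDecP par ∧ pvSoundP land n m par ∧
      (∀ c ∈ pre, ∀ d, pvStepEdge land n m c d →
        pvRootT par (pvIdx m c) = pvRootT par (pvIdx m d)))
    ⟨by simp, fun j => by rw [hrange j], fun i => by rw [hrange i]; exact Relation.EqvGen.refl i,
      by simp⟩
    ?_
  · rw [hb]
    refine ⟨hQ.1, hQ.2.1, hQ.2.2.1, ?_⟩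
    intro c d hadj
    have hone_c := hadj.1
    have hone_d := hadj.2.1
    have hc_scan : c ∈ pvScanL n m := (mem_pvScanL n m c).mpr ⟨hone_c.1, hone_c.2.1⟩
    have hd_scan : d ∈ pvScanL n m := (mem_pvScanL n m d).mpr ⟨hone_d.1, hone_d.2.1⟩
    rcases hadj.2.2 with ⟨hr, hs | hs⟩ | ⟨hr, hs | hs⟩
    · exact hQ.2.2.2 c hc_scan d ⟨hadj, Or.inl ⟨hr.symm, hs.symm⟩⟩
    · exact (hQ.2.2.2 d hd_scan c ⟨pvAdjP_symm land n m hadj, Or.inl ⟨hr, hs.symm⟩⟩).symm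
    · exact hQ.2.2.2 c hc_scan d ⟨hadj, Or.inr ⟨hs.symm, hr.symm⟩⟩
    · exact (hQ.2.2.2 d hd_scan c ⟨pvAdjP_symm land n m hadj, Or.inr ⟨hs.symm, hr⟩⟩).symm
  · -- step
    rintro pre e suf par hdec0 ⟨hlen, hdec, hsound, hinv⟩
    beta_reduce
    have hescan : e ∈ pvScanL n m := by rw [hdec0]; simp
    have he1 : e.1 < n := ((mem_pvScanL n m e).mp hescan).1
    have he2 : e.2 < m := ((mem_pvScanL n m e).mp hescan).2
    by_cases hcell : pvCell land e.1 e.2 = 1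
    · rw [if_pos hcell]
      dsimp only
      have hone : pvOneP land n m e := ⟨he1, he2, hcell⟩
      have hi_lt : pvIdx m e < n * m := pvIdx_lt n m e he1 he2
      -- the right union
      by_cases hR : e.2 + 1 < m ∧ pvCell land e.1 (e.2 + 1) = 1
      · rw [if_pos hR]
        have honeR : pvOneP land n m (e.1, e.2 + 1) := ⟨he1, hR.1, hR.2⟩
        have hadjR : pvAdjP land n m e (e.1, e.2 + 1) :=
          ⟨hone, honeR, Or.inl ⟨rfl, Or.inl rfl⟩⟩
        have hiR : pvIdx m (e.1, e.2 + 1) = pvIdx m e + 1 := rfl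
        have hedgeR : pvREI land n m (e.1 * m + e.2) (e.1 * m + e.2 + 1) := by
          rw [show e.1 * m + e.2 = pvIdx m e from rfl, ← hiR]
          exact pvREI_of_adj land n m e (e.1, e.2 + 1) he2 hR.1 hadjR
        have hspecR := pvUnion_spec land n m par (e.1 * m + e.2) (e.1 * m + e.2 + 1)
          hlen hdec hsound hi_lt (by
            have h := pvIdx_lt n m (e.1, e.2 + 1) he1 hR.1
            unfold pvIdx at h
            dsimp only at h
            omega) hedgeR
        set par1 := pvUnion par (n * m) (e.1 * m + e.2) (e.1 * m + e.2 + 1) with hpar1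
        -- the down union
        by_cases hD : e.1 + 1 < n ∧ pvCell land (e.1 + 1) e.2 = 1
        · rw [if_pos hD]
          have honeD : pvOneP land n m (e.1 + 1, e.2) := ⟨hD.1, he2, hD.2⟩
          have hadjD : pvAdjP land n m e (e.1 + 1, e.2) :=
            ⟨hone, honeD, Or.inr ⟨rfl, Or.inl rfl⟩⟩
          have hiD : pvIdx m (e.1 + 1, e.2) = pvIdx m e + m := by
            unfold pvIdx
            ring
          have hedgeD : pvREI land n m (e.1 * m + e.2) (e.1 * m + e.2 + m) := by
            rw [show e.1 * m + e.2 = pvIdx m e from rfl, ← hiD]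
            exact pvREI_of_adj land n m e (e.1 + 1, e.2) he2 he2 hadjD
          have hspecD := pvUnion_spec land n m par1 (e.1 * m + e.2) (e.1 * m + e.2 + m)
            hspecR.1 hspecR.2.1 hspecR.2.2.1 hi_lt
            (by
            have h := pvIdx_lt n m (e.1 + 1, e.2) (by omega) he2
            unfold pvIdx at h
            dsimp only at h
            have h2 : (e.1 + 1) * m = e.1 * m + m := by ring
            omega) hedgeD
          refine ⟨hspecD.1, hspecD.2.1, hspecD.2.2.1, ?_⟩
          intro c hc d hstep
          rcases List.mem_append.mp hc with hc | hc
          · exact hspecD.2.2.2.2 _ _ (hspecR.2.2.2.2 _ _ (hinv c hc d hstep))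
          · simp only [List.mem_singleton] at hc
            subst hc
            rcases hstep.2 with ⟨h1, h2⟩ | ⟨h1, h2⟩
            · -- right edge
              have hd_eq : d = (c.1, c.2 + 1) := Prod.ext h1 h2
              subst hd_eq
              rw [hiR]
              exact hspecD.2.2.2.2 _ _ hspecR.2.2.2.1
            · -- down edge
              have hd_eq : d = (c.1 + 1, c.2) := Prod.ext h1 h2
              subst hd_eq
              rw [hiD]
              exact hspecD.2.2.2.1
        · rw [if_neg hD]
          refine ⟨hspecR.1, hspecR.2.1, hspecR.2.2.1, ?_⟩
          intro c hc d hstep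
          rcases List.mem_append.mp hc with hc | hc
          · exact hspecR.2.2.2.2 _ _ (hinv c hc d hstep)
          · simp only [List.mem_singleton] at hc
            subst hc
            rcases hstep.2 with ⟨h1, h2⟩ | ⟨h1, h2⟩
            · have hd_eq : d = (c.1, c.2 + 1) := Prod.ext h1 h2
              subst hd_eq
              rw [hiR]
              exact hspecR.2.2.2.1
            · exfalso
              have hone_d := hstep.1.2.1
              have hd_eq : d = (c.1 + 1, c.2) := Prod.ext h1 h2
              subst hd_eq
              exact hD ⟨hone_d.1, hone_d.2.2⟩
      · rw [if_neg hR]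
        by_cases hD : e.1 + 1 < n ∧ pvCell land (e.1 + 1) e.2 = 1
        · rw [if_pos hD]
          have honeD : pvOneP land n m (e.1 + 1, e.2) := ⟨hD.1, he2, hD.2⟩
          have hadjD : pvAdjP land n m e (e.1 + 1, e.2) :=
            ⟨hone, honeD, Or.inr ⟨rfl, Or.inl rfl⟩⟩
          have hiD : pvIdx m (e.1 + 1, e.2) = pvIdx m e + m := by
            unfold pvIdx
            ring
          have hedgeD : pvREI land n m (e.1 * m + e.2) (e.1 * m + e.2 + m) := by
            rw [show e.1 * m + e.2 = pvIdx m e from rfl, ← hiD]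
            exact pvREI_of_adj land n m e (e.1 + 1, e.2) he2 he2 hadjD
          have hspecD := pvUnion_spec land n m par (e.1 * m + e.2) (e.1 * m + e.2 + m)
            hlen hdec hsound hi_lt
            (by
            have h := pvIdx_lt n m (e.1 + 1, e.2) (by omega) he2
            unfold pvIdx at h
            dsimp only at h
            have h2 : (e.1 + 1) * m = e.1 * m + m := by ring
            omega) hedgeD
          refine ⟨hspecD.1, hspecD.2.1, hspecD.2.2.1, ?_⟩
          intro c hc d hstep
          rcases List.mem_append.mp hc with hc | hc
          · exact hspecD.2.2.2.2 _ _ (hinv c hc d hstep)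
          · simp only [List.mem_singleton] at hc
            subst hc
            rcases hstep.2 with ⟨h1, h2⟩ | ⟨h1, h2⟩
            · exfalso
              have hone_d := hstep.1.2.1
              have hd_eq : d = (c.1, c.2 + 1) := Prod.ext h1 h2
              subst hd_eq
              exact hR ⟨hone_d.2.1, hone_d.2.2⟩
            · have hd_eq : d = (c.1 + 1, c.2) := Prod.ext h1 h2
              subst hd_eq
              rw [hiD]
              exact hspecD.2.2.2.1
        · rw [if_neg hD]
          refine ⟨hlen, hdec, hsound, ?_⟩
          intro c hc d hstep
          rcases List.mem_append.mp hc with hc | hc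
          · exact hinv c hc d hstep
          · simp only [List.mem_singleton] at hc
            subst hc
            exfalso
            rcases hstep.2 with ⟨h1, h2⟩ | ⟨h1, h2⟩
            · have hone_d := hstep.1.2.1
              have hd_eq : d = (c.1, c.2 + 1) := Prod.ext h1 h2
              subst hd_eq
              exact hR ⟨hone_d.2.1, hone_d.2.2⟩
            · have hone_d := hstep.1.2.1
              have hd_eq : d = (c.1 + 1, c.2) := Prod.ext h1 h2
              subst hd_eq
              exact hD ⟨hone_d.1, hone_d.2.2⟩
    · rw [if_neg hcell]
      refine ⟨hlen, hdec, hsound, ?_⟩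
      intro c hc d hstep
      rcases List.mem_append.mp hc with hc | hc
      · exact hinv c hc d hstep
      · simp only [List.mem_singleton] at hc
        subst hc
        exact absurd hstep.1.1.2.2 hcell

theorem pvREI_to_reach (land : List (List Int)) (n m : Nat) (i j : Nat)
    (h : pvREI land n m i j) :
    pvReachP land n m (i / m, i % m) (j / m, j % m) := by
  induction h with
  | rel x y hxy => exact Relation.ReflTransGen.single hxy
  | refl x => exact Relation.ReflTransGen.refl
  | symm x y _ ih => exact pvReachP_symm land n m ih
  | trans x y z _ _ ih1 ih2 => exact ih1.trans ih2

theorem pvRoot_reach (land : List (List Int)) (n m : Nat) (P : List Nat)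
    (hcomp : ∀ c d, pvAdjP land n m c d →
      pvRootT P (pvIdx m c) = pvRootT P (pvIdx m d))
    (c d : Nat × Nat) (h : pvReachP land n m c d) :
    pvRootT P (pvIdx m c) = pvRootT P (pvIdx m d) := by
  induction h with
  | refl => rfl
  | tail _ hadj ih => exact ih.trans (hcomp _ _ hadj)

theorem pvIdx_mod_div (m : Nat) (r : Nat) : pvIdx m (r / m, r % m) = r := by
  unfold pvIdx
  dsimp only
  rw [Nat.mul_comm]
  exact Nat.div_add_mod r m

theorem pvRootCell (land : List (List Int)) (n m : Nat) (hm0 : 0 < m) (P : List Nat)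
    (hdec : pvDecP P) (hsound : pvSoundP land n m P)
    (hcomp : ∀ c d, pvAdjP land n m c d →
      pvRootT P (pvIdx m c) = pvRootT P (pvIdx m d))
    (c : Nat × Nat) (hone : pvOneP land n m c) :
    ∃ rc : Nat × Nat, pvIsRootP land n m rc ∧ pvReachP land n m rc c ∧
      pvIdx m rc = pvRootT P (pvIdx m c) := by
  set r := pvRootT P (pvIdx m c) with hr
  have hrei : pvREI land n m r (pvIdx m c) := pvRootT_rei land n m P hsound (pvIdx m c)
  have hreach : pvReachP land n m (r / m, r % m) c := by
    have h := pvREI_to_reach land n m _ _ hrei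
    rw [pvCellEq land n m c hone.2.1] at h
    exact h
  refine ⟨(r / m, r % m), ⟨?_, ?_⟩, hreach, pvIdx_mod_div m r⟩
  · -- the root cell is an oil cell
    rcases Relation.ReflTransGen.cases_head hreach with heq | ⟨x, hadj, _⟩
    · rw [heq]; exact hone
    · exact hadj.1
  · -- it has the least scan index in its component
    intro d hreach'
    have hone_rc : pvOneP land n m (r / m, r % m) := by
      rcases Relation.ReflTransGen.cases_head hreach with heq | ⟨x, hadj, _⟩
      · rw [heq]; exact hone
      · exact hadj.1
    have hone_d : pvOneP land n m d := pvReachP_one_right land n m hone_rc hreach'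
    have hroot_eq := pvRoot_reach land n m P hcomp _ _ hreach'
    rw [pvIdx_mod_div m r] at hroot_eq
    have hfixr : pvRootT P r = r := by
      rw [hr]
      exact pvRootT_of_fix P _ (pvRootT_fix P hdec (pvIdx m c))
    rw [hfixr] at hroot_eq
    calc pvIdx m (r / m, r % m) = r := pvIdx_mod_div m r
      _ = pvRootT P (pvIdx m d) := hroot_eq
      _ ≤ pvIdx m d := pvRootT_le P (pvIdx m d)

theorem pvIsRoot_iff_rootT (land : List (List Int)) (n m : Nat) (hm0 : 0 < m)
    (P : List Nat) (hdec : pvDecP P) (hsound : pvSoundP land n m P)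
    (hcomp : ∀ c d, pvAdjP land n m c d →
      pvRootT P (pvIdx m c) = pvRootT P (pvIdx m d))
    (c : Nat × Nat) (hone : pvOneP land n m c) :
    pvIsRootP land n m c ↔ pvRootT P (pvIdx m c) = pvIdx m c := by
  constructor
  · rintro ⟨_, hmin⟩
    obtain ⟨rc, hrc_root, hrc_reach, hrc_idx⟩ :=
      pvRootCell land n m hm0 P hdec hsound hcomp c hone
    have h1 : pvIdx m c ≤ pvIdx m rc := hmin rc (pvReachP_symm land n m hrc_reach)
    have h2 : pvRootT P (pvIdx m c) ≤ pvIdx m c := pvRootT_le P (pvIdx m c)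
    omega
  · intro hfix
    refine ⟨hone, ?_⟩
    intro d hreach
    have h := pvRoot_reach land n m P hcomp _ _ hreach
    rw [hfix] at h
    calc pvIdx m c = pvRootT P (pvIdx m d) := h
      _ ≤ pvIdx m d := pvRootT_le P (pvIdx m d)

theorem pvRoot_unique (land : List (List Int)) (n m : Nat) (rc rc' : Nat × Nat)
    (h1 : pvIsRootP land n m rc) (h2 : pvIsRootP land n m rc')
    (h : pvReachP land n m rc rc') : rc = rc' := by
  have ha := h1.2 rc' h
  have hb := h2.2 rc (pvReachP_symm land n m h)
  exact pvIdx_inj m rc rc' h1.1.2.1 h2.1.2.1 (by omega)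

theorem mem_pvRootsL (land : List (List Int)) (n m : Nat) (rc : Nat × Nat) :
    rc ∈ pvRootsL land n m ↔ pvIsRootP land n m rc := by
  unfold pvRootsL
  rw [List.mem_filter, @decide_eq_true_iff _ (Classical.propDecidable _)]
  constructor
  · tauto
  · intro h
    exact ⟨(mem_pvScanL n m rc).mpr ⟨h.1.1, h.1.2.1⟩, h⟩

set_option maxHeartbeats 2000000 in
theorem pvStats_spec (land : List (List Int)) (n m : Nat) (hm0 : 0 < m) (P : List Nat)
    (hlen : P.length = n * m) (hdec : pvDecP P) (hsound : pvSoundP land n m P)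
    (hcomp : ∀ c d, pvAdjP land n m c d →
      pvRootT P (pvIdx m c) = pvRootT P (pvIdx m d)) :
    (pvStats land n m P).1.keys = (pvRootsL land n m).map (pvIdx m) ∧
    (pvStats land n m P).2.1.keys = (pvRootsL land n m).map (pvIdx m) ∧
    (pvStats land n m P).2.2.keys = (pvRootsL land n m).map (pvIdx m) ∧
    (∀ rc ∈ pvRootsL land n m,
      (pvStats land n m P).1.get? (pvIdx m rc) = some (pvCntC land n m rc) ∧
      (pvStats land n m P).2.1.get? (pvIdx m rc) = some (pvLoC land n m rc) ∧
      (pvStats land n m P).2.2.get? (pvIdx m rc) = some (pvHiC land n m rc)) := by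
  have hb : pvStats land n m P = (pvScanL n m).foldl
      (fun (st : PySem.Dict Nat Int × PySem.Dict Nat Int × PySem.Dict Nat Int) c =>
        if pvCell land c.1 c.2 = 1 then
          let r := pvFind P (n * m) (c.1 * m + c.2)
          (st.1.insert r (st.1.getD r 0 + 1),
           st.2.1.insert r (min (st.2.1.getD r 501) (c.2 : Int)),
           st.2.2.insert r (max (st.2.2.getD r 0) (c.2 : Int)))
        else st)
      (PySem.Dict.empty, PySem.Dict.empty, PySem.Dict.empty) := by
    unfold pvStats
    rw [pvFoldlScan]
  have hQ := pvFoldlInd (pvScanL n m)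
    (fun (st : PySem.Dict Nat Int × PySem.Dict Nat Int × PySem.Dict Nat Int) c =>
        if pvCell land c.1 c.2 = 1 then
          let r := pvFind P (n * m) (c.1 * m + c.2)
          (st.1.insert r (st.1.getD r 0 + 1),
           st.2.1.insert r (min (st.2.1.getD r 501) (c.2 : Int)),
           st.2.2.insert r (max (st.2.2.getD r 0) (c.2 : Int)))
        else st)
    (PySem.Dict.empty, PySem.Dict.empty, PySem.Dict.empty)
    (fun pre st =>
      st.1.keys = (pre.filter (fun c =>
          @decide _ (Classical.propDecidable (pvIsRootP land n m c)))).map (pvIdx m) ∧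
      st.2.1.keys = (pre.filter (fun c =>
          @decide _ (Classical.propDecidable (pvIsRootP land n m c)))).map (pvIdx m) ∧
      st.2.2.keys = (pre.filter (fun c =>
          @decide _ (Classical.propDecidable (pvIsRootP land n m c)))).map (pvIdx m) ∧
      (∀ rc, pvIsRootP land n m rc → rc ∈ pre →
        st.1.get? (pvIdx m rc)
          = some (((pre.filter (fun d => @decide _ (Classical.propDecidable
              (pvOneP land n m d ∧ pvReachP land n m rc d)))).length : Int)) ∧
        st.2.1.get? (pvIdx m rc)
          = some ((pre.filter (fun d => @decide _ (Classical.propDecidable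
              (pvOneP land n m d ∧ pvReachP land n m rc d)))).foldl
                (fun a d => min a (d.2 : Int)) 501) ∧
        st.2.2.get? (pvIdx m rc)
          = some ((pre.filter (fun d => @decide _ (Classical.propDecidable
              (pvOneP land n m d ∧ pvReachP land n m rc d)))).foldl
                (fun a d => max a (d.2 : Int)) 0)))
    ⟨by simp [PySem.Dict.keys_empty], by simp [PySem.Dict.keys_empty],
      by simp [PySem.Dict.keys_empty], by
        intro rc _ hrc
        simp at hrc⟩
    ?_
  · rw [hb]
    refine ⟨hQ.1, hQ.2.1, hQ.2.2.1, ?_⟩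
    intro rc hrc
    have hroot := (mem_pvRootsL land n m rc).mp hrc
    have hpre : rc ∈ pvScanL n m := (mem_pvScanL n m rc).mpr ⟨hroot.1.1, hroot.1.2.1⟩
    exact hQ.2.2.2 rc hroot hpre
  · -- step
    rintro pre e suf ⟨sz, lo, hi⟩ hdec0 ⟨hk1, hk2, hk3, hvals⟩
    beta_reduce
    have hescan : e ∈ pvScanL n m := by rw [hdec0]; simp
    have he1 : e.1 < n := ((mem_pvScanL n m e).mp hescan).1
    have he2 : e.2 < m := ((mem_pvScanL n m e).mp hescan).2
    have hprefix := pvScanL_prefix_mem n m hm0 pre suf e hdec0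
    have he_pre : e ∉ pre := by
      have hnd := pvScanL_nodup n m hm0
      rw [hdec0, List.nodup_append] at hnd
      intro hc
      exact hnd.2.2 e hc e List.mem_cons_self rfl
    by_cases hcell : pvCell land e.1 e.2 = 1
    · rw [if_pos hcell]
      dsimp only
      have hone : pvOneP land n m e := ⟨he1, he2, hcell⟩
      have hfind : pvFind P (n * m) (e.1 * m + e.2) = pvRootT P (pvIdx m e) :=
        pvFind_eq_rootT P hdec (n * m) _ (pvIdx_lt n m e he1 he2)
      rw [hfind]
      obtain ⟨rc₀, hrc₀_root, hrc₀_reach, hrc₀_idx⟩ :=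
        pvRootCell land n m hm0 P hdec hsound hcomp e hone
      rw [← hrc₀_idx]
      by_cases hroot : pvIsRootP land n m e
      · -- e is the first cell of its component
        have hrc₀_eq : rc₀ = e := pvRoot_unique land n m rc₀ e hrc₀_root hroot hrc₀_reach
        rw [hrc₀_eq] at hrc₀_idx hrc₀_reach ⊢
        have hfreshkey : ∀ (d : PySem.Dict Nat Int),
            d.keys = (pre.filter (fun c =>
              @decide _ (Classical.propDecidable (pvIsRootP land n m c)))).map (pvIdx m) →
            d.contains (pvIdx m e) = false := by
          intro d hkeys
          rw [← Bool.not_eq_true, PySem.Dict.contains_iff_mem_keys, hkeys]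
          intro hc
          simp only [List.mem_map, List.mem_filter] at hc
          obtain ⟨rc', ⟨hrc'_pre, hrc'_dec⟩, hrc'_idx⟩ := hc
          rw [@decide_eq_true_iff _ (Classical.propDecidable _)] at hrc'_dec
          have : rc' = e := pvIdx_inj m rc' e hrc'_dec.1.2.1 he2 hrc'_idx
          subst this
          exact he_pre hrc'_pre
        have hfilter_pre : pre.filter (fun d => @decide _ (Classical.propDecidable
            (pvOneP land n m d ∧ pvReachP land n m e d))) = [] := by
          rw [List.filter_eq_nil_iff]
          intro d hd
          rw [@decide_eq_true_iff _ (Classical.propDecidable _)]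
          rintro ⟨hd_one, hd_reach⟩
          have h1 : pvIdx m d < pvIdx m e := ((hprefix d).mp hd).2.2
          have h2 := hroot.2 d hd_reach
          omega
        have hdecE : (@decide (pvIsRootP land n m e)
            (Classical.propDecidable _)) = true := by
          rw [@decide_eq_true_iff _ (Classical.propDecidable _)]
          exact hroot
        refine ⟨?_, ?_, ?_, ?_⟩
        · rw [PySem.Dict.keys_insert_of_not_contains _ _ (hfreshkey sz hk1), hk1,
            List.filter_append, List.map_append]
          simp [hdecE]
        · rw [PySem.Dict.keys_insert_of_not_contains _ _ (hfreshkey lo hk2), hk2,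
            List.filter_append, List.map_append]
          simp [hdecE]
        · rw [PySem.Dict.keys_insert_of_not_contains _ _ (hfreshkey hi hk3), hk3,
            List.filter_append, List.map_append]
          simp [hdecE]
        · intro rc hrc_root hrc_mem
          rcases List.mem_append.mp hrc_mem with hrc_mem | hrc_mem
          · -- an old root: untouched key, untouched member list
            have hrc_ne : pvIdx m rc ≠ pvIdx m e := by
              intro hc
              have heq2 : rc = e := pvIdx_inj m rc e hrc_root.1.2.1 he2 hc
              exact he_pre (heq2 ▸ hrc_mem)
            have hnofilt : (fun d => @decide _ (Classical.propDecidable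
                (pvOneP land n m d ∧ pvReachP land n m rc d))) e = false := by
              rw [@decide_eq_false_iff_not _ (Classical.propDecidable _)]
              rintro ⟨_, hreach⟩
              have h1 := pvRoot_reach land n m P hcomp _ _ hreach
              rw [(pvIsRoot_iff_rootT land n m hm0 P hdec hsound hcomp rc
                hrc_root.1).mp hrc_root, ← hrc₀_idx] at h1
              have heq2 : rc = e := pvIdx_inj m rc e hrc_root.1.2.1 he2 h1
              exact he_pre (heq2 ▸ hrc_mem)
            have hv := hvals rc hrc_root hrc_mem
            rw [PySem.Dict.get?_insert_of_ne _ _ hrc_ne,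
              PySem.Dict.get?_insert_of_ne _ _ hrc_ne,
              PySem.Dict.get?_insert_of_ne _ _ hrc_ne,
              List.filter_append]
            simp only [List.filter_cons, List.filter_nil, hnofilt,
              Bool.false_eq_true, if_false, List.append_nil]
            exact hv
          · -- the new root itself
            simp only [List.mem_singleton] at hrc_mem
            rw [hrc_mem]
            have hgd1 : sz.getD (pvIdx m e) 0 = 0 :=
              PySem.Dict.getD_of_not_contains _ _ (hfreshkey sz hk1)
            have hgd2 : lo.getD (pvIdx m e) 501 = 501 :=
              PySem.Dict.getD_of_not_contains _ _ (hfreshkey lo hk2)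
            have hgd3 : hi.getD (pvIdx m e) 0 = 0 :=
              PySem.Dict.getD_of_not_contains _ _ (hfreshkey hi hk3)
            have hfilt_e : (fun d => @decide _ (Classical.propDecidable
                (pvOneP land n m d ∧ pvReachP land n m e d))) e = true := by
              rw [@decide_eq_true_iff _ (Classical.propDecidable _)]
              exact ⟨hone, hrc₀_reach⟩
            rw [List.filter_append]
            simp only [List.filter_cons, List.filter_nil, hfilt_e, if_true,
              hfilter_pre, List.nil_append]
            rw [PySem.Dict.get?_insert_self, PySem.Dict.get?_insert_self,
              PySem.Dict.get?_insert_self, hgd1, hgd2, hgd3]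
            simp
      · -- e joins an existing component
        have hrc₀_ne : rc₀ ≠ e := by
          intro hc
          subst hc
          exact hroot hrc₀_root
        have hrc₀_lt : pvIdx m rc₀ < pvIdx m e := by
          have h1 : pvRootT P (pvIdx m e) ≤ pvIdx m e := pvRootT_le P (pvIdx m e)
          have h2 : pvRootT P (pvIdx m e) ≠ pvIdx m e := by
            intro hc
            exact hroot ((pvIsRoot_iff_rootT land n m hm0 P hdec hsound hcomp
              e hone).mpr hc)
          omega
        have hrc₀_pre : rc₀ ∈ pre := (hprefix rc₀).mpr
          ⟨hrc₀_root.1.1, hrc₀_root.1.2.1, hrc₀_lt⟩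
        have hrc₀_dec : (@decide (pvIsRootP land n m rc₀)
            (Classical.propDecidable _)) = true := by
          rw [@decide_eq_true_iff _ (Classical.propDecidable _)]
          exact hrc₀_root
        have hkeymem : ∀ (d : PySem.Dict Nat Int),
            d.keys = (pre.filter (fun c =>
              @decide _ (Classical.propDecidable (pvIsRootP land n m c)))).map (pvIdx m) →
            d.contains (pvIdx m rc₀) = true := by
          intro d hkeys
          rw [PySem.Dict.contains_iff_mem_keys, hkeys]
          exact List.mem_map_of_mem (List.mem_filter.mpr ⟨hrc₀_pre, hrc₀_dec⟩)
        have hdecE : (@decide (pvIsRootP land n m e)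
            (Classical.propDecidable _)) = false := by
          rw [@decide_eq_false_iff_not _ (Classical.propDecidable _)]
          exact hroot
        have hfilt_e : (fun d => @decide _ (Classical.propDecidable
            (pvOneP land n m d ∧ pvReachP land n m rc₀ d))) e = true := by
          rw [@decide_eq_true_iff _ (Classical.propDecidable _)]
          exact ⟨hone, hrc₀_reach⟩
        refine ⟨?_, ?_, ?_, ?_⟩
        · rw [PySem.Dict.keys_insert_of_contains _ _ (hkeymem sz hk1), hk1,
            List.filter_append]
          simp [hdecE]
        · rw [PySem.Dict.keys_insert_of_contains _ _ (hkeymem lo hk2), hk2,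
            List.filter_append]
          simp [hdecE]
        · rw [PySem.Dict.keys_insert_of_contains _ _ (hkeymem hi hk3), hk3,
            List.filter_append]
          simp [hdecE]
        · intro rc hrc_root hrc_mem
          rcases List.mem_append.mp hrc_mem with hrc_mem | hrc_mem
          · by_cases hrc_eq : rc = rc₀
            · subst hrc_eq
              obtain ⟨hv1, hv2, hv3⟩ := hvals rc hrc_root hrc₀_pre
              rw [List.filter_append]
              simp only [List.filter_cons, List.filter_nil, hfilt_e, if_true]
              rw [PySem.Dict.get?_insert_self, PySem.Dict.get?_insert_self,
                PySem.Dict.get?_insert_self,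
                PySem.Dict.getD_of_get?_eq_some _ _ hv1,
                PySem.Dict.getD_of_get?_eq_some _ _ hv2,
                PySem.Dict.getD_of_get?_eq_some _ _ hv3]
              rw [List.foldl_append, List.foldl_append]
              simp only [List.foldl_cons, List.foldl_nil, List.length_append,
                List.length_cons, List.length_nil]
              refine ⟨congrArg some (by push_cast; ring), trivial, trivial⟩
            · have hrc_ne : pvIdx m rc ≠ pvIdx m rc₀ := by
                intro hc
                exact hrc_eq (pvIdx_inj m rc rc₀ hrc_root.1.2.1 hrc₀_root.1.2.1 hc)
              have hnofilt : (fun d => @decide _ (Classical.propDecidable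
                  (pvOneP land n m d ∧ pvReachP land n m rc d))) e = false := by
                rw [@decide_eq_false_iff_not _ (Classical.propDecidable _)]
                rintro ⟨_, hreach⟩
                have h1 := pvRoot_reach land n m P hcomp _ _ hreach
                rw [(pvIsRoot_iff_rootT land n m hm0 P hdec hsound hcomp rc
                  hrc_root.1).mp hrc_root, ← hrc₀_idx] at h1
                exact hrc_eq (pvIdx_inj m rc rc₀ hrc_root.1.2.1 hrc₀_root.1.2.1 h1)
              have hv := hvals rc hrc_root hrc_mem
              rw [PySem.Dict.get?_insert_of_ne _ _ hrc_ne,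
                PySem.Dict.get?_insert_of_ne _ _ hrc_ne,
                PySem.Dict.get?_insert_of_ne _ _ hrc_ne,
                List.filter_append]
              simp only [List.filter_cons, List.filter_nil, hnofilt,
                Bool.false_eq_true, if_false, List.append_nil]
              exact hv
          · simp only [List.mem_singleton] at hrc_mem
            subst hrc_mem
            exact absurd hrc_root hroot
    · rw [if_neg hcell]
      have hnot_one : ¬ pvOneP land n m e := fun h => hcell h.2.2
      have hdecE : (@decide (pvIsRootP land n m e) (Classical.propDecidable _)) = false := by
        rw [@decide_eq_false_iff_not _ (Classical.propDecidable _)]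
        exact fun h => hnot_one h.1
      have hnofilt : ∀ rc : Nat × Nat, (fun d => @decide _ (Classical.propDecidable
          (pvOneP land n m d ∧ pvReachP land n m rc d))) e = false := by
        intro rc
        rw [@decide_eq_false_iff_not _ (Classical.propDecidable _)]
        exact fun h => hnot_one h.1
      refine ⟨?_, ?_, ?_, ?_⟩
      · rw [hk1, List.filter_append]; simp [hdecE]
      · rw [hk2, List.filter_append]; simp [hdecE]
      · rw [hk3, List.filter_append]; simp [hdecE]
      · intro rc hrc_root hrc_mem
        rcases List.mem_append.mp hrc_mem with hrc_mem | hrc_mem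
        · have hv := hvals rc hrc_root hrc_mem
          rw [List.filter_append]
          simp only [List.filter_cons, List.filter_nil, hnofilt rc,
            Bool.false_eq_true, if_false, List.append_nil]
          exact hv
        · simp only [List.mem_singleton] at hrc_mem
          subst hrc_mem
          exact absurd hrc_root.1 hnot_one

theorem pvB_main (land : List (List Int)) (hm0 : 0 < (land.getD 0 []).length) :
    solution_alt land
      = (PySem.List.max? (pvAnsC land land.length (land.getD 0 []).length)
          (fun v => v)).getD 0 := by
  obtain ⟨hlen, hdec, hsound, hcomp⟩ :=
    pvBuild_spec land land.length (land.getD 0 []).length hm0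
  obtain ⟨hk1, hk2, hk3, hvals⟩ :=
    pvStats_spec land land.length (land.getD 0 []).length hm0
      (pvBuildParent land land.length (land.getD 0 []).length) hlen hdec hsound hcomp
  have hans : ((pvStats land land.length (land.getD 0 []).length
        (pvBuildParent land land.length (land.getD 0 []).length)).1.keys.foldl
      (fun a r =>
        pvAddRangeB a
          ((pvStats land land.length (land.getD 0 []).length
            (pvBuildParent land land.length (land.getD 0 []).length)).2.1.getD r 0)
          ((pvStats land land.length (land.getD 0 []).length
            (pvBuildParent land land.length (land.getD 0 []).length)).2.2.getD r 0)
          ((pvStats land land.length (land.getD 0 []).length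
            (pvBuildParent land land.length (land.getD 0 []).length)).1.getD r 0))
      (List.replicate (land.getD 0 []).length 0))
      = pvAnsC land land.length (land.getD 0 []).length := by
    rw [hk1, List.foldl_map]
    unfold pvAnsC
    apply PySem.List.foldl_congr_mem
    intro acc rc hrc
    obtain ⟨hv1, hv2, hv3⟩ := hvals rc hrc
    rw [PySem.Dict.getD_of_get?_eq_some _ _ hv1,
      PySem.Dict.getD_of_get?_eq_some _ _ hv2,
      PySem.Dict.getD_of_get?_eq_some _ _ hv3]
    rfl
  show (PySem.List.max? ((pvStats land land.length (land.getD 0 []).length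
        (pvBuildParent land land.length (land.getD 0 []).length)).1.keys.foldl
      (fun a r =>
        pvAddRangeB a
          ((pvStats land land.length (land.getD 0 []).length
            (pvBuildParent land land.length (land.getD 0 []).length)).2.1.getD r 0)
          ((pvStats land land.length (land.getD 0 []).length
            (pvBuildParent land land.length (land.getD 0 []).length)).2.2.getD r 0)
          ((pvStats land land.length (land.getD 0 []).length
            (pvBuildParent land land.length (land.getD 0 []).length)).1.getD r 0))
      (List.replicate (land.getD 0 []).length 0)) (fun v => v)).getD 0 = _
  rw [hans]

-- ===== VERDICT (by name: the statement is the Claim_ definition above) =====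
theorem solution_spec : Claim_equal_solution := by
  intro land hdom hpre
  unfold Spec_solution
  have hm0 : 0 < (land.getD 0 []).length := Nat.pos_of_ne_zero hpre.2.1
  rw [pvA_main land hm0, pvB_main land hm0]
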